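-- pv_equiv track=rewrite | github.com/ShinWon-Chul/AlgorithmWithPython | programmers/연습문제/level2/무인도 여행(bfs).py | solution
-- ===== SOURCE A (Python) =====
-- from collections import deque
--
-- dx = [0, 0, -1, 1]
--
-- dy = [-1, 1, 0, 0]
--
-- def dfs(maps, visited, q, n, m):
--     score = 0
--     loc = [[q[0][0], q[0][1]]]
--     visited[q[0][1]][q[0][0]] = 1
--     while q:
--         x, y = q.popleft()
--         for i in range(4):
--             nx = x + dx[i]
--             ny = y + dy[i]
--             if 0 <= nx < n and 0 <= ny < m:
--                 if maps[ny][nx] != 'X' and visited[ny][nx] == 0: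
--                     visited[ny][nx] = 1
--                     q.append([nx, ny])
--                     loc.append([nx, ny])
--     for x, y in loc:
--         score += int(maps[y][x])
--     return score
--
-- def solution(maps):
--     answer = []
--     n = len(maps[0])
--     m = len(maps)
--     visited = [ [0 for _ in range(n)] for _ in range(m)]
--
--     for y, row in enumerate(maps):
--         for x, col in enumerate(row):
--             if col != 'X' and visited[y][x] == 0:
--                 q = deque([[x, y]])
--                 answer.append(dfs(maps, visited, q, n, m))
--
--     answer.sort()
--     if len(answer) == 0:
--         return [-1]
--     else:
--         return answer
-- ===== SOURCE B (Python) =====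
-- def solution(maps):
--     m = len(maps)
--     n = len(maps[0])
--     # union-find over flattened indices y*n+x, union-by-smaller-root (no path compression)
--     parent = list(range(n * m))
--
--     def find(i):
--         while parent[i] != i:
--             i = parent[i]
--         return i
--
--     def union(a, b):
--         ra, rb = find(a), find(b)
--         if ra < rb:
--             parent[rb] = ra
--         elif rb < ra:
--             parent[ra] = rb
--
--     for y in range(m):
--         row = maps[y]
--         for x in range(len(row)):
--             if row[x] != 'X':
--                 if x + 1 < len(row) and row[x + 1] != 'X':
--                     union(y * n + x, y * n + x + 1)
--                 if y + 1 < m and x < len(maps[y + 1]) and maps[y + 1][x] != 'X':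
--                     union(y * n + x, (y + 1) * n + x)
--
--     sums = {}
--     for y in range(m):
--         row = maps[y]
--         for x in range(len(row)):
--             if row[x] != 'X':
--                 r = find(y * n + x)
--                 sums[r] = sums.get(r, 0) + int(row[x])
--
--     ans = sorted(sums.values())
--     return ans if ans else [-1]
-- ===== Notes on version B (the rewrite author's own statement) =====
-- stated objective: alternative
-- what changed: Replaces A's per-island BFS flood fill (deque, 0/1 visited matrix, collecting cell coordinates and summing in a second pass) by a disjoint-set union-find over flattened grid indices: one pass unions each non-'X' cell with its right and down non-'X' neighbours, a second pass groups digit sums in a dict keyed by the union-find root, and the dict's values are sorted.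
import Mathlib
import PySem

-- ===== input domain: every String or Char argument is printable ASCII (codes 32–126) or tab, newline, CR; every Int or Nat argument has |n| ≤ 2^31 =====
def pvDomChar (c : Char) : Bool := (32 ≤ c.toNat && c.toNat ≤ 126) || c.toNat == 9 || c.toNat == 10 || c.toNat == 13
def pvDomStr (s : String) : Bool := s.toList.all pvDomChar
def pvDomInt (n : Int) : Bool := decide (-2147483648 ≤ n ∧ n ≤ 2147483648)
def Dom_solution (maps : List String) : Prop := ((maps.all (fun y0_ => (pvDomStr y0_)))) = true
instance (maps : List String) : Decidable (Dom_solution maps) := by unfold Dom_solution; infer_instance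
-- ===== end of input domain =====

-- B replaces A's per-island BFS flood fill (deque + 0/1 visited matrix + a second summing pass)
-- by a disjoint-set (union-find) over flattened grid indices: one pass unions each non-'X' cell
-- with its right and down non-'X' neighbours, a second pass groups digit sums by root in a dict;
-- objective: alternative (no speed claim).

-- shared low-level accessors (exact for the in-range, non-negative indices that are the only
-- ones either program reaches on inputs admitted by Pre_solution)
-- maps[y][x] (read only under guards 0 ≤ x, 0 ≤ y and in-range bounds)
def cellAt (maps : List String) (x y : Int) : Char :=
  ((maps.getD y.toNat "").toList).getD x.toNat 'X'

-- int(maps[y][x]) — exact when the cell is a digit (Pre_solution guarantees that)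
def digitAt (maps : List String) (x y : Int) : Int :=
  (PySem.Int.ofChars? [cellAt maps x y]).getD 0

-- ===== PORT A =====
def pvDx : List Int := [0, 0, -1, 1]
def pvDy : List Int := [-1, 1, 0, 0]

-- visited[y][x] (A only reads/writes in-range non-negative indices)
def mgetA (vis : List (List Int)) (x y : Int) : Int :=
  (vis.getD y.toNat []).getD x.toNat 0

-- visited[y][x] = 1
def msetA (vis : List (List Int)) (x y : Int) : List (List Int) :=
  vis.set y.toNat ((vis.getD y.toNat []).set x.toNat 1)

-- the body of "for i in range(4): …" for one neighbour candidate (nx, ny)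
def bodyA (maps : List String) (n m : Int)
    (st : List (List Int) × List (Int × Int) × List (Int × Int)) (p : Int × Int) :
    List (List Int) × List (Int × Int) × List (Int × Int) :=
  if 0 ≤ p.1 ∧ p.1 < n ∧ 0 ≤ p.2 ∧ p.2 < m then
    if cellAt maps p.1 p.2 ≠ 'X' ∧ mgetA st.1 p.1 p.2 = 0 then
      (msetA st.1 p.1 p.2, st.2.1 ++ [p], st.2.2 ++ [p])
    else st
  else st

-- "for i in range(4): nx = x + dx[i]; ny = y + dy[i]; …"
def dfsStep (maps : List String) (n m x y : Int)
    (st : List (List Int) × List (Int × Int) × List (Int × Int)) :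
    List (List Int) × List (Int × Int) × List (Int × Int) :=
  (List.range 4).foldl
    (fun st i => bodyA maps n m st (x + pvDx.getD i 0, y + pvDy.getD i 0)) st

-- "while q: x, y = q.popleft(); …" (fuel is only a totality device; the sufficiency proof is below)
def dfsLoop (maps : List String) (n m : Int) :
    Nat → List (Int × Int) → List (List Int) → List (Int × Int) →
    List (List Int) × List (Int × Int)
  | 0, _, vis, loc => (vis, loc)
  | _ + 1, [], vis, loc => (vis, loc)
  | fuel + 1, (x, y) :: rest, vis, loc =>
    let r := dfsStep maps n m x y (vis, rest, loc)
    dfsLoop maps n m fuel r.2.1 r.1 r.2.2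

-- dfs(maps, visited, q, n, m); returns (mutated visited, score)
def dfsA (maps : List String) (visited : List (List Int)) (q : List (Int × Int)) (n m : Int) :
    List (List Int) × Int :=
  match q with
  | [] => (visited, 0)   -- q[0] would raise IndexError; solution never calls dfs with an empty deque
  | (x0, y0) :: _ =>
    let loc : List (Int × Int) := [(x0, y0)]
    let visited := msetA visited x0 y0
    let r := dfsLoop maps n m (m.toNat * n.toNat + q.length) q visited loc
    (r.1, r.2.foldl (fun s p => s + digitAt maps p.1 p.2) 0)

def solution (maps : List String) : List Int :=
  let n : Int := (((PySem.List.pyGet? maps 0).getD "").toList.length : Int)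
  let m : Int := (maps.length : Int)
  let visited0 : List (List Int) := List.replicate m.toNat (List.replicate n.toNat (0 : Int))
  let r :=
    (PySem.List.enumerate maps).foldl (fun st yrow =>
      (PySem.List.enumerate yrow.2.toList).foldl (fun st xcol =>
        if xcol.2 ≠ 'X' ∧ mgetA st.1 xcol.1 yrow.1 = 0 then
          let d := dfsA maps st.1 [(xcol.1, yrow.1)] n m
          (d.1, st.2 ++ [d.2])
        else st) st) (visited0, ([] : List Int))
  let answer := PySem.List.sorted r.2 (fun v => v) false
  if answer.length = 0 then [-1] else answer

-- ===== PORT B =====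
-- "while parent[i] != i: i = parent[i]; return i" (fuel is only a totality device; the
-- sufficiency proof is below: parents strictly decrease)
def findR (p : List Int) : Nat → Int → Int
  | 0, i => i
  | f + 1, i => let j := p.getD i.toNat i; if j = i then i else findR p f j

def findB (p : List Int) (i : Int) : Int := findR p (i.toNat + 1) i

-- union(a, b): point the larger root at the smaller
def unionB (p : List Int) (a b : Int) : List Int :=
  let ra := findB p a
  let rb := findB p b
  if ra < rb then p.set rb.toNat ra
  else if rb < ra then p.set ra.toNat rb
  else p

-- first pass: union each non-'X' cell with its right and down non-'X' neighbours
def pass1 (maps : List String) (n m : Int) : List Int :=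
  (PySem.List.pyRange 0 m 1).foldl (fun p y =>
    (PySem.List.pyRange 0 (((maps.getD y.toNat "").toList.length : Int)) 1).foldl (fun p x =>
      if cellAt maps x y ≠ 'X' then
        let p :=
          if x + 1 < (((maps.getD y.toNat "").toList.length : Int)) ∧
              cellAt maps (x + 1) y ≠ 'X'
          then unionB p (y * n + x) (y * n + x + 1) else p
        if y + 1 < m ∧ x < (((maps.getD (y + 1).toNat "").toList.length : Int)) ∧
            cellAt maps x (y + 1) ≠ 'X'
        then unionB p (y * n + x) ((y + 1) * n + x) else p
      else p) p)
    (PySem.List.pyRange 0 (n * m) 1)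

-- second pass: sums[find(y*n+x)] += int(maps[y][x])
def pass2 (maps : List String) (p : List Int) (n m : Int) : PySem.Dict Int Int :=
  (PySem.List.pyRange 0 m 1).foldl (fun d y =>
    (PySem.List.pyRange 0 (((maps.getD y.toNat "").toList.length : Int)) 1).foldl (fun d x =>
      if cellAt maps x y ≠ 'X' then
        let r := findB p (y * n + x)
        d.insert r (d.getD r 0 + digitAt maps x y)
      else d) d)
    PySem.Dict.empty

def solution_alt (maps : List String) : List Int :=
  let m : Int := (maps.length : Int)
  let n : Int := (((PySem.List.pyGet? maps 0).getD "").toList.length : Int)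
  let parent := pass1 maps n m
  let ans := PySem.List.sorted (pass2 maps parent n m).values (fun v => v) false
  if ans = [] then [-1] else ans

-- ===== PRECONDITION & SPEC =====
-- Every cell of every row past index len(maps[0])-1 is 'X' (A would hit an IndexError on its
-- visited matrix there otherwise)
def pvPadOk (maps : List String) : Bool :=
  maps.all (fun r => (r.toList.drop (maps.headD "").toList.length).all (fun c => c == 'X'))

-- Every in-bounds neighbour (w.r.t. the n = len(maps[0]), m = len(maps) box) of every non-'X'
-- cell lies inside its own row (A reads maps[ny][nx] there and would raise IndexError otherwise)
def pvNbrSafe (maps : List String) : Bool :=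
  (List.range maps.length).all (fun y =>
    (List.range ((maps.getD y "").toList.length)).all (fun x =>
      ((maps.getD y "").toList.getD x 'X' == 'X') ||
      ((!(decide (x + 1 < (maps.headD "").toList.length)) ||
          decide (x + 1 < (maps.getD y "").toList.length)) &&
       (!(decide (y + 1 < maps.length)) ||
          decide (x < (maps.getD (y + 1) "").toList.length)) &&
       (!(decide (1 ≤ y)) ||
          decide (x < (maps.getD (y - 1) "").toList.length)))))

-- Pre_solution is exactly the set of inputs on which A returns: a non-empty grid whose non-'X'
-- cells are digits, whose cells beyond column len(maps[0])-1 are all 'X', and whose non-'X'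
-- cells have all their in-box neighbours inside their own rows (otherwise A raises IndexError
-- on maps[0], its visited matrix or a ragged row, or ValueError on int of a non-digit).
def Pre_solution (maps : List String) : Prop :=
  maps ≠ [] ∧
  (maps.all (fun r => r.toList.all (fun c => c == 'X' || ('0' ≤ c && c ≤ '9')))) = true ∧
  pvPadOk maps = true ∧
  pvNbrSafe maps = true

instance (maps : List String) : Decidable (Pre_solution maps) := by
  unfold Pre_solution; infer_instance

def pvWitness_solution : List String := ["12X", "X3X"]

def Spec_solution (maps : List String) (out : List Int) : Prop := out = solution_alt maps
instance (maps : List String) (out : List Int) : Decidable (Spec_solution maps out) := by unfold Spec_solution; infer_instance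

-- ===== CLAIM (what is proved, stated in full; the proofs are below) =====
def Claim_equal_solution : Prop := ∀ (maps : List String), Dom_solution maps → Pre_solution maps → Spec_solution maps (solution maps)

-- ===== LEMMAS AND PROOFS =====

-- n (all row lengths under Pre_), m
def gN (maps : List String) : Nat := (maps.headD "").toList.length
def gM (maps : List String) : Nat := maps.length

def GoodP (maps : List String) (p : Int × Int) : Prop :=
  0 ≤ p.1 ∧ p.1 < (gN maps : Int) ∧ 0 ≤ p.2 ∧ p.2 < (gM maps : Int) ∧
    cellAt maps p.1 p.2 ≠ 'X'

def AdjP (maps : List String) (p q : Int × Int) : Prop :=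
  GoodP maps p ∧ GoodP maps q ∧
    (q = (p.1 + 1, p.2) ∨ q = (p.1 - 1, p.2) ∨ q = (p.1, p.2 + 1) ∨ q = (p.1, p.2 - 1))

inductive Reach (maps : List String) : (Int × Int) → (Int × Int) → Prop
  | refl (p) : GoodP maps p → Reach maps p p
  | tail {p q r} : Reach maps p q → AdjP maps q r → Reach maps p r

def allCells (maps : List String) : Finset (Int × Int) :=
  ((Finset.range (gN maps)) ×ˢ (Finset.range (gM maps))).image
    (fun ab => ((ab.1 : Int), (ab.2 : Int)))

noncomputable def reachF (maps : List String) (s : Int × Int) : Finset (Int × Int) :=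
  @Finset.filter _ (fun p => Reach maps s p) (Classical.decPred _) (allCells maps)

noncomputable def compSum (maps : List String) (s : Int × Int) : Int :=
  ∑ p ∈ reachF maps s, digitAt maps p.1 p.2

def visSet (maps : List String) (vis : List (List Int)) : Finset (Int × Int) :=
  (allCells maps).filter (fun p => mgetA vis p.1 p.2 ≠ 0)

def ShapeA (maps : List String) (vis : List (List Int)) : Prop :=
  vis.length = gM maps ∧ ∀ r ∈ vis, r.length = gN maps

def ClosedF (maps : List String) (V : Finset (Int × Int)) : Prop :=
  ∀ p ∈ V, ∀ r, AdjP maps p r → r ∈ V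

lemma adj_symm {maps : List String} {p q : Int × Int} (h : AdjP maps p q) : AdjP maps q p := by
  obtain ⟨hp, hq, hd⟩ := h
  refine ⟨hq, hp, ?_⟩
  obtain ⟨x, y⟩ := p; obtain ⟨x', y'⟩ := q
  rcases hd with h | h | h | h <;> simp_all [Prod.ext_iff]

lemma reach_good {maps : List String} {s p : Int × Int} (h : Reach maps s p) : GoodP maps p := by
  induction h with
  | refl h => exact h
  | tail _ hadj _ => exact hadj.2.1

lemma mem_allCells {maps : List String} {p : Int × Int} :
    p ∈ allCells maps ↔ 0 ≤ p.1 ∧ p.1 < (gN maps : Int) ∧ 0 ≤ p.2 ∧ p.2 < (gM maps : Int) := by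
  obtain ⟨x, y⟩ := p
  simp only [allCells, Finset.mem_image, Finset.mem_product, Finset.mem_range, Prod.ext_iff]
  constructor
  · rintro ⟨⟨a, b⟩, ⟨ha, hb⟩, h1, h2⟩
    simp only at h1 h2
    subst h1; subst h2
    refine ⟨by positivity, by exact_mod_cast ha, by positivity, by exact_mod_cast hb⟩
  · rintro ⟨h1, h2, h3, h4⟩
    exact ⟨(x.toNat, y.toNat), ⟨by omega, by omega⟩, by simp; omega, by simp; omega⟩

lemma mem_reachF {maps : List String} {s p : Int × Int} :
    p ∈ reachF maps s ↔ Reach maps s p := by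
  simp only [reachF, Finset.mem_filter, mem_allCells]
  constructor
  · exact fun h => h.2
  · intro h
    have := reach_good h
    exact ⟨⟨this.1, this.2.1, this.2.2.1, this.2.2.2.1⟩, h⟩

lemma closed_reach {maps : List String} {V : Finset (Int × Int)} {s : Int × Int}
    (hcl : ClosedF maps V) (hs : s ∈ V) {p : Int × Int} (h : Reach maps s p) : p ∈ V := by
  induction h with
  | refl _ => exact hs
  | tail _ hadj ih => exact hcl _ ih _ hadj

lemma reach_disjoint {maps : List String} {V : Finset (Int × Int)} {s : Int × Int}
    (hcl : ClosedF maps V) (hs : s ∉ V) {p : Int × Int} (h : Reach maps s p) : p ∉ V := by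
  induction h with
  | refl _ => exact hs
  | tail _ hadj ih => exact fun hr => ih (hcl _ hr _ (adj_symm hadj))

lemma closedF_reachF {maps : List String} (s : Int × Int) : ClosedF maps (reachF maps s) := by
  intro p hp r hadj
  rw [mem_reachF] at hp ⊢
  exact Reach.tail hp hadj

lemma closedF_union {maps : List String} {V W : Finset (Int × Int)}
    (hV : ClosedF maps V) (hW : ClosedF maps W) : ClosedF maps (V ∪ W) := by
  intro p hp r hadj
  rcases Finset.mem_union.1 hp with h | h
  · exact Finset.mem_union_left _ (hV _ h _ hadj)
  · exact Finset.mem_union_right _ (hW _ h _ hadj)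

lemma shape_msetA {maps : List String} {vis : List (List Int)} {x y : Int}
    (h : ShapeA maps vis) : ShapeA maps (msetA vis x y) := by
  by_cases hy : y.toNat < vis.length
  · refine ⟨by simpa [msetA] using h.1, ?_⟩
    intro r hr
    rcases List.mem_or_eq_of_mem_set hr with h' | h'
    · exact h.2 r h'
    · subst h'
      rw [List.length_set]
      rw [List.getD_eq_getElem _ _ hy]
      exact h.2 _ (List.getElem_mem _)
  · have : msetA vis x y = vis := by
      unfold msetA
      exact List.set_eq_of_length_le (by omega)
    rw [this]; exact h

lemma mget_msetA {maps : List String} {vis : List (List Int)} {x y x' y' : Int}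
    (h : ShapeA maps vis)
    (hx : 0 ≤ x) (hx2 : x < (gN maps : Int)) (hy : 0 ≤ y) (hy2 : y < (gM maps : Int))
    (hx' : 0 ≤ x') (hy' : 0 ≤ y') :
    mgetA (msetA vis x y) x' y' = if x' = x ∧ y' = y then 1 else mgetA vis x' y' := by
  have hylen : y.toNat < vis.length := by
    have := h.1; omega
  have hrow : vis[y.toNat]?.getD [] = vis[y.toNat] := by
    rw [List.getElem?_eq_getElem hylen]; rfl
  have hrlen : vis[y.toNat].length = gN maps := h.2 _ (List.getElem_mem _)
  have hxlen : x.toNat < vis[y.toNat].length := by omega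
  unfold mgetA msetA
  simp only [List.getD_eq_getElem?_getD]
  by_cases hyy : y' = y
  · subst hyy
    rw [List.getElem?_set_self (by omega), Option.getD_some, hrow]
    by_cases hxx : x' = x
    · subst hxx
      rw [if_pos ⟨rfl, rfl⟩, List.getElem?_set_self (by omega), Option.getD_some]
    · have hne : x.toNat ≠ x'.toNat := by omega
      rw [if_neg (by tauto), List.getElem?_set_ne hne]
  · have hne : y.toNat ≠ y'.toNat := by omega
    rw [if_neg (by tauto), List.getElem?_set_ne hne]

lemma mem_visSet {maps : List String} {vis : List (List Int)} {x y : Int}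
    (hb : 0 ≤ x ∧ x < (gN maps : Int) ∧ 0 ≤ y ∧ y < (gM maps : Int)) :
    (x, y) ∈ visSet maps vis ↔ mgetA vis x y ≠ 0 := by
  simp [visSet, Finset.mem_filter, mem_allCells, hb.1, hb.2.1, hb.2.2.1, hb.2.2.2]

lemma visSet_msetA {maps : List String} {vis : List (List Int)} {x y : Int}
    (h : ShapeA maps vis)
    (hx : 0 ≤ x) (hx2 : x < (gN maps : Int)) (hy : 0 ≤ y) (hy2 : y < (gM maps : Int)) :
    visSet maps (msetA vis x y) = insert (x, y) (visSet maps vis) := by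
  ext ⟨a, b⟩
  by_cases hab : 0 ≤ a ∧ a < (gN maps : Int) ∧ 0 ≤ b ∧ b < (gM maps : Int)
  · rw [Finset.mem_insert, mem_visSet hab, mem_visSet hab,
      mget_msetA h hx hx2 hy hy2 hab.1 hab.2.2.1]
    by_cases habxy : a = x ∧ b = y
    · obtain ⟨rfl, rfl⟩ := habxy
      rw [if_pos ⟨rfl, rfl⟩]
      exact iff_of_true one_ne_zero (Or.inl rfl)
    · rw [if_neg habxy]
      constructor
      · exact fun h => Or.inr h
      · rintro (heq | h)
        · exact absurd ⟨congrArg Prod.fst heq, congrArg Prod.snd heq⟩ habxy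
        · exact h
  · have h1 : ((a, b) : Int × Int) ∉ allCells maps := by
      rw [mem_allCells]; simpa using hab
    have h2 : ((a, b) : Int × Int) ≠ (x, y) := by
      intro heq
      cases heq
      exact hab ⟨hx, hx2, hy, hy2⟩
    simp only [Finset.mem_insert, h2, false_or]
    constructor
    · intro hmem
      exact absurd (Finset.mem_filter.1 hmem).1 h1
    · intro hmem
      exact absurd (Finset.mem_filter.1 hmem).1 h1

-- a non-'X' reading of cellAt means the cell really exists in its row
lemma cell_exists {maps : List String} {x y : Int}
    (hc : cellAt maps x y ≠ 'X') : x.toNat < (maps.getD y.toNat "").toList.length := by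
  by_contra h
  exact hc (List.getD_eq_default _ _ (by omega))

-- a non-'X' cell lies left of column n (the pvPadOk part of Pre_solution)
lemma cell_lt_n {maps : List String} (hpre : Pre_solution maps) {x y : Int}
    (hx : 0 ≤ x) (hy : 0 ≤ y) (hy2 : y < (gM maps : Int))
    (hc : cellAt maps x y ≠ 'X') : x < (gN maps : Int) := by
  have hylen : y.toNat < maps.length := by unfold gM at hy2; omega
  have hrowmem : maps.getD y.toNat "" ∈ maps := by
    rw [List.getD_eq_getElem _ _ hylen]
    exact List.getElem_mem _
  have hpad := hpre.2.2.1
  unfold pvPadOk at hpad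
  rw [List.all_eq_true] at hpad
  have hrow := hpad _ hrowmem
  rw [List.all_eq_true] at hrow
  by_contra hlt
  have hxn : gN maps ≤ x.toNat := by unfold gN at hlt ⊢; omega
  have hxlen := cell_exists hc
  have hmem : (maps.getD y.toNat "").toList[x.toNat] ∈
      (maps.getD y.toNat "").toList.drop ((maps.headD "").toList.length) := by
    rw [List.mem_iff_getElem]
    refine ⟨x.toNat - gN maps, by rw [List.length_drop]; unfold gN at hxn ⊢; omega, ?_⟩
    rw [List.getElem_drop]
    congr 1
    unfold gN at hxn ⊢
    omega
  have hX := hrow _ hmem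
  rw [beq_iff_eq] at hX
  apply hc
  unfold cellAt
  rw [List.getD_eq_getElem _ _ hxlen]
  exact hX

lemma foldA_spec {maps : List String} {n m : Int}
    (hn : n = (gN maps : Int)) (hm : m = (gM maps : Int)) :
    ∀ (cands : List (Int × Int)) (vis : List (List Int)) (rest loc : List (Int × Int)),
    ShapeA maps vis → cands.Nodup →
    ∃ (vis' : List (List Int)) (news : List (Int × Int)),
      List.foldl (bodyA maps n m) (vis, rest, loc) cands = (vis', rest ++ news, loc ++ news) ∧
      ShapeA maps vis' ∧
      visSet maps vis' = visSet maps vis ∪ news.toFinset ∧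
      news.Nodup ∧
      (∀ p ∈ news, p ∈ cands ∧ GoodP maps p ∧ p ∉ visSet maps vis) ∧
      (∀ p ∈ cands, GoodP maps p → p ∉ visSet maps vis → p ∈ news) := by
  intro cands
  induction cands with
  | nil =>
    intro vis rest loc hsh _
    exact ⟨vis, [], by simp, hsh, by simp, List.nodup_nil, by simp, by simp⟩
  | cons c cs ih =>
    intro vis rest loc hsh hnd
    rw [List.foldl_cons]
    by_cases h1 : 0 ≤ c.1 ∧ c.1 < n ∧ 0 ≤ c.2 ∧ c.2 < m
    · by_cases h2 : cellAt maps c.1 c.2 ≠ 'X' ∧ mgetA vis c.1 c.2 = 0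
      · -- the candidate is marked and enqueued
        have hb : 0 ≤ c.1 ∧ c.1 < (gN maps : Int) ∧ 0 ≤ c.2 ∧ c.2 < (gM maps : Int) := by
          rw [hn, hm] at h1; exact h1
        have hgood : GoodP maps c := ⟨hb.1, hb.2.1, hb.2.2.1, hb.2.2.2, h2.1⟩
        have hcnotin : c ∉ visSet maps vis := by
          rw [show c = (c.1, c.2) from rfl, mem_visSet hb]
          simpa using h2.2
        have hbody : bodyA maps n m (vis, rest, loc) c =
            (msetA vis c.1 c.2, rest ++ [c], loc ++ [c]) := by
          unfold bodyA
          rw [if_pos h1, if_pos h2]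
        rw [hbody]
        obtain ⟨vis', news, heq, hsh', hvs, hnd', hprop, hcomp⟩ :=
          ih (msetA vis c.1 c.2) (rest ++ [c]) (loc ++ [c]) (shape_msetA hsh)
            (List.Nodup.of_cons hnd)
        have hvm : visSet maps (msetA vis c.1 c.2) = insert c (visSet maps vis) := by
          rw [visSet_msetA hsh hb.1 hb.2.1 hb.2.2.1 hb.2.2.2]
        refine ⟨vis', c :: news, ?_, hsh', ?_, ?_, ?_, ?_⟩
        · rw [heq]
          simp
        · rw [hvs, hvm, List.toFinset_cons, Finset.insert_union, Finset.union_insert]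
        · refine List.Nodup.cons ?_ hnd'
          intro hc
          have := (hprop c hc).2.2
          rw [hvm] at this
          exact this (Finset.mem_insert_self _ _)
        · intro p hp
          rcases List.mem_cons.1 hp with rfl | hp'
          · exact ⟨List.mem_cons_self, hgood, hcnotin⟩
          · obtain ⟨hm1, hm2, hm3⟩ := hprop p hp'
            refine ⟨List.mem_cons_of_mem _ hm1, hm2, ?_⟩
            rw [hvm] at hm3
            exact fun hmem => hm3 (Finset.mem_insert_of_mem hmem)
        · intro p hp hpg hpv
          rcases List.mem_cons.1 hp with rfl | hp'
          · exact List.mem_cons_self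
          · have hpc : p ≠ c := by
              rintro rfl
              exact (List.nodup_cons.1 hnd).1 hp'
            refine List.mem_cons_of_mem _ (hcomp p hp' hpg ?_)
            rw [hvm]
            intro hmem
            rcases Finset.mem_insert.1 hmem with h | h
            · exact hpc h
            · exact hpv h
      · -- skipped: cell is 'X' or already visited
        have hbody : bodyA maps n m (vis, rest, loc) c = (vis, rest, loc) := by
          unfold bodyA
          rw [if_pos h1, if_neg h2]
        rw [hbody]
        obtain ⟨vis', news, heq, hsh', hvs, hnd', hprop, hcomp⟩ :=
          ih vis rest loc hsh (List.Nodup.of_cons hnd)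
        refine ⟨vis', news, heq, hsh', hvs, hnd', ?_, ?_⟩
        · intro p hp
          obtain ⟨hm1, hm2, hm3⟩ := hprop p hp
          exact ⟨List.mem_cons_of_mem _ hm1, hm2, hm3⟩
        · intro p hp hpg hpv
          rcases List.mem_cons.1 hp with rfl | hp'
          · exfalso
            push Not at h2
            have hb : 0 ≤ p.1 ∧ p.1 < (gN maps : Int) ∧ 0 ≤ p.2 ∧ p.2 < (gM maps : Int) :=
              ⟨hpg.1, hpg.2.1, hpg.2.2.1, hpg.2.2.2.1⟩
            have := h2 hpg.2.2.2.2
            apply hpv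
            rw [show p = (p.1, p.2) from rfl, mem_visSet hb]
            exact this
          · exact hcomp p hp' hpg hpv
    · -- out of bounds: skipped
      have hbody : bodyA maps n m (vis, rest, loc) c = (vis, rest, loc) := by
        unfold bodyA
        rw [if_neg h1]
      rw [hbody]
      obtain ⟨vis', news, heq, hsh', hvs, hnd', hprop, hcomp⟩ :=
        ih vis rest loc hsh (List.Nodup.of_cons hnd)
      refine ⟨vis', news, heq, hsh', hvs, hnd', ?_, ?_⟩
      · intro p hp
        obtain ⟨hm1, hm2, hm3⟩ := hprop p hp
        exact ⟨List.mem_cons_of_mem _ hm1, hm2, hm3⟩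
      · intro p hp hpg hpv
        rcases List.mem_cons.1 hp with rfl | hp'
        · exact absurd ⟨hpg.1, by rw [hn]; exact hpg.2.1, hpg.2.2.1, by rw [hm]; exact hpg.2.2.2.1⟩ h1
        · exact hcomp p hp' hpg hpv

-- the four neighbour candidates, exactly as the range-4 loop of A produces them
def candsA (x y : Int) : List (Int × Int) :=
  [(x + 0, y + -1), (x + 0, y + 1), (x + -1, y + 0), (x + 1, y + 0)]

lemma dfsStep_eq (maps : List String) (n m x y : Int)
    (st : List (List Int) × List (Int × Int) × List (Int × Int)) :
    dfsStep maps n m x y st = List.foldl (bodyA maps n m) st (candsA x y) := rfl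

lemma mem_candsA {x y : Int} {p : Int × Int} :
    p ∈ candsA x y ↔
      (p = (x + 1, y) ∨ p = (x - 1, y) ∨ p = (x, y + 1) ∨ p = (x, y - 1)) := by
  obtain ⟨a, b⟩ := p
  simp only [candsA, List.mem_cons, List.not_mem_nil, or_false, Prod.mk.injEq]
  omega

lemma nodup_candsA (x y : Int) : (candsA x y).Nodup := by
  simp [candsA, Prod.ext_iff]

lemma visSet_subset_allCells (maps : List String) (vis : List (List Int)) :
    visSet maps vis ⊆ allCells maps := Finset.filter_subset _ _

lemma final_eq {maps : List String} {s : Int × Int}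
    {V0 V : Finset (Int × Int)}
    (hVs : ∀ p ∈ V, p ∈ V0 ∨ Reach maps s p)
    (hcl : ∀ p ∈ V, ∀ r, AdjP maps p r → r ∈ V)
    (hV0 : V0 ⊆ V) (hs : s ∈ V) :
    V = V0 ∪ reachF maps s := by
  ext p
  rw [Finset.mem_union, mem_reachF]
  constructor
  · exact fun h => hVs p h
  · rintro (h | h)
    · exact hV0 h
    · exact closed_reach hcl hs h

lemma dfsLoop_spec {maps : List String} {n m : Int}
    (hn : n = (gN maps : Int)) (hm : m = (gM maps : Int))
    (s : Int × Int) (V0 : Finset (Int × Int)) :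
    ∀ (fuel : Nat) (q : List (Int × Int)) (vis : List (List Int)) (loc : List (Int × Int)),
    ShapeA maps vis →
    (∀ p ∈ q, p ∈ visSet maps vis ∧ GoodP maps p ∧ Reach maps s p) →
    (∀ p ∈ visSet maps vis, p ∈ V0 ∨ Reach maps s p) →
    (∀ p ∈ visSet maps vis, p ∉ q → ∀ r, AdjP maps p r → r ∈ visSet maps vis) →
    loc.Nodup →
    (∀ p, p ∈ loc ↔ p ∈ visSet maps vis ∧ p ∉ V0) →
    V0 ⊆ visSet maps vis →
    s ∈ visSet maps vis →
    q.length + ((allCells maps).card - (visSet maps vis).card) ≤ fuel →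
    ShapeA maps (dfsLoop maps n m fuel q vis loc).1 ∧
    visSet maps (dfsLoop maps n m fuel q vis loc).1 = V0 ∪ reachF maps s ∧
    (dfsLoop maps n m fuel q vis loc).2.Nodup ∧
    (∀ p, p ∈ (dfsLoop maps n m fuel q vis loc).2 ↔
      p ∈ visSet maps (dfsLoop maps n m fuel q vis loc).1 ∧ p ∉ V0) := by
  intro fuel
  induction fuel with
  | zero =>
    intro q vis loc hsh hq hVs hcl hndloc hloc hV0 hs hfuel
    have hq0 : q = [] := by
      cases q with
      | nil => rfl
      | cons a l => simp at hfuel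
    subst hq0
    refine ⟨hsh, final_eq hVs (by simpa using hcl) hV0 hs, hndloc, hloc⟩
  | succ fuel ih =>
    intro q vis loc hsh hq hVs hcl hndloc hloc hV0 hs hfuel
    cases q with
    | nil =>
      refine ⟨hsh, final_eq hVs (by simpa using hcl) hV0 hs, hndloc, hloc⟩
    | cons hd rest =>
      obtain ⟨x, y⟩ := hd
      have hstep : dfsLoop maps n m (fuel + 1) ((x, y) :: rest) vis loc =
          dfsLoop maps n m fuel (dfsStep maps n m x y (vis, rest, loc)).2.1
            (dfsStep maps n m x y (vis, rest, loc)).1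
            (dfsStep maps n m x y (vis, rest, loc)).2.2 := rfl
      rw [hstep, dfsStep_eq]
      obtain ⟨vis', news, heq, hsh', hvs, hndnews, hprop, hcomp⟩ :=
        foldA_spec hn hm (candsA x y) vis rest loc hsh (nodup_candsA x y)
      rw [heq]
      obtain ⟨hhdV, hhdG, hhdR⟩ := hq (x, y) List.mem_cons_self
      have hnewsF : ∀ p, p ∈ news.toFinset ↔ p ∈ news := fun p => List.mem_toFinset
      have hnews_adj : ∀ p ∈ news, AdjP maps (x, y) p := by
        intro p hp
        obtain ⟨hc, hg, _⟩ := hprop p hp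
        exact ⟨hhdG, hg, by simpa using mem_candsA.1 hc⟩
      have hadj_cover : ∀ r, AdjP maps (x, y) r → r ∈ visSet maps vis ∨ r ∈ news := by
        intro r hadj
        by_cases hrv : r ∈ visSet maps vis
        · exact Or.inl hrv
        · refine Or.inr (hcomp r ?_ hadj.2.1 hrv)
          rw [mem_candsA]
          simpa using hadj.2.2
      have hsub : ∀ p ∈ visSet maps vis, p ∈ visSet maps vis' := by
        intro p hp
        rw [hvs]
        exact Finset.mem_union_left _ hp
      have hnews_in : ∀ p ∈ news, p ∈ visSet maps vis' := by
        intro p hp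
        rw [hvs]
        exact Finset.mem_union_right _ (List.mem_toFinset.2 hp)
      have hnews_not : ∀ p ∈ news, p ∉ visSet maps vis := fun p hp => (hprop p hp).2.2
      refine ih (rest ++ news) vis' (loc ++ news) hsh' ?_ ?_ ?_ ?_ ?_ ?_ ?_ ?_
      · -- queue invariant
        intro p hp
        rcases List.mem_append.1 hp with hp' | hp'
        · obtain ⟨h1, h2, h3⟩ := hq p (List.mem_cons_of_mem _ hp')
          exact ⟨hsub p h1, h2, h3⟩
        · exact ⟨hnews_in p hp', (hprop p hp').2.1, Reach.tail hhdR (hnews_adj p hp')⟩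
      · -- soundness
        intro p hp
        rw [hvs] at hp
        rcases Finset.mem_union.1 hp with hp' | hp'
        · exact hVs p hp'
        · exact Or.inr (Reach.tail hhdR (hnews_adj p (List.mem_toFinset.1 hp')))
      · -- closedness outside the queue
        intro p hp hpq r hadj
        rw [hvs] at hp
        rcases Finset.mem_union.1 hp with hp' | hp'
        · by_cases hpxy : p = (x, y)
          · subst hpxy
            rcases hadj_cover r hadj with h | h
            · exact hsub r h
            · exact hnews_in r h
          · have hpnotin : p ∉ (x, y) :: rest := by
              intro hmem
              rcases List.mem_cons.1 hmem with h | h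
              · exact hpxy h
              · exact hpq (List.mem_append.2 (Or.inl h))
            exact hsub r (hcl p hp' hpnotin r hadj)
        · exact absurd (List.mem_append.2 (Or.inr (List.mem_toFinset.1 hp'))) hpq
      · -- loc nodup
        refine List.Nodup.append hndloc hndnews ?_
        intro p hp1 hp2
        exact hnews_not p hp2 ((hloc p).1 hp1).1
      · -- loc characterisation
        intro p
        rw [List.mem_append, hloc p, hvs, Finset.mem_union, List.mem_toFinset]
        constructor
        · rintro (⟨h1, h2⟩ | h1)
          · exact ⟨Or.inl h1, h2⟩
          · refine ⟨Or.inr h1, ?_⟩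
            intro hmem
            exact hnews_not p h1 (hV0 hmem)
        · rintro ⟨h1 | h1, h2⟩
          · exact Or.inl ⟨h1, h2⟩
          · exact Or.inr h1
      · -- V0 below the visited set
        intro p hp
        exact hsub p (hV0 hp)
      · -- start is visited
        exact hsub s hs
      · -- fuel bound
        have hdisj : Disjoint (visSet maps vis) news.toFinset := by
          rw [Finset.disjoint_left]
          intro p hp hp'
          exact hnews_not p (List.mem_toFinset.1 hp') hp
        have hcard : (visSet maps vis').card = (visSet maps vis).card + news.length := by
          rw [hvs, Finset.card_union_of_disjoint hdisj, List.toFinset_card_of_nodup hndnews]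
        have hsub' : (visSet maps vis').card ≤ (allCells maps).card :=
          Finset.card_le_card (visSet_subset_allCells maps vis')
        rw [List.length_append]
        simp only [List.length_cons] at hfuel
        omega

lemma card_allCells_le (maps : List String) : (allCells maps).card ≤ gN maps * gM maps := by
  have h1 := Finset.card_image_le (s := (Finset.range (gN maps)) ×ˢ (Finset.range (gM maps)))
    (f := fun ab => ((ab.1 : Int), (ab.2 : Int)))
  rw [Finset.card_product, Finset.card_range, Finset.card_range] at h1
  exact h1

lemma dfsA_spec {maps : List String} {n m : Int}
    (hn : n = (gN maps : Int)) (hm : m = (gM maps : Int))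
    (vis : List (List Int)) (s : Int × Int) (hsh : ShapeA maps vis)
    (hgood : GoodP maps s) (hnot : s ∉ visSet maps vis)
    (hcl : ClosedF maps (visSet maps vis)) :
    ShapeA maps (dfsA maps vis [s] n m).1 ∧
    visSet maps (dfsA maps vis [s] n m).1 = visSet maps vis ∪ reachF maps s ∧
    (dfsA maps vis [s] n m).2 = compSum maps s := by
  obtain ⟨sx, sy⟩ := s
  obtain ⟨hb1, hb2, hb3, hb4, hb5⟩ := hgood
  simp only at hb1 hb2 hb3 hb4 hb5
  have hgood' : GoodP maps (sx, sy) := ⟨hb1, hb2, hb3, hb4, hb5⟩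
  have hvm : visSet maps (msetA vis sx sy) = insert (sx, sy) (visSet maps vis) :=
    visSet_msetA hsh hb1 hb2 hb3 hb4
  have hmem1 : (sx, sy) ∈ visSet maps (msetA vis sx sy) := by
    rw [hvm]; exact Finset.mem_insert_self _ _
  have hspec := dfsLoop_spec hn hm (sx, sy) (visSet maps vis)
    (m.toNat * n.toNat + 1) [(sx, sy)] (msetA vis sx sy) [(sx, sy)]
    (shape_msetA hsh)
    (by
      intro p hp
      rw [List.mem_singleton] at hp
      subst hp
      exact ⟨hmem1, hgood', Reach.refl _ hgood'⟩)
    (by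
      intro p hp
      rw [hvm] at hp
      rcases Finset.mem_insert.1 hp with rfl | hp'
      · exact Or.inr (Reach.refl _ hgood')
      · exact Or.inl hp')
    (by
      intro p hp hpq r hadj
      rw [hvm] at hp
      rcases Finset.mem_insert.1 hp with rfl | hp'
      · exact absurd (List.mem_singleton.2 rfl) hpq
      · rw [hvm]
        exact Finset.mem_insert_of_mem (hcl p hp' r hadj))
    (List.nodup_singleton _)
    (by
      intro p
      rw [List.mem_singleton, hvm]
      constructor
      · rintro rfl
        exact ⟨Finset.mem_insert_self _ _, hnot⟩
      · rintro ⟨hp1, hp2⟩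
        rcases Finset.mem_insert.1 hp1 with rfl | hp'
        · rfl
        · exact absurd hp' hp2)
    (by
      rw [hvm]
      exact Finset.subset_insert _ _)
    hmem1
    (by
      have h1 : (allCells maps).card ≤ gN maps * gM maps := card_allCells_le maps
      have h2 : m.toNat = gM maps := by omega
      have h3 : n.toNat = gN maps := by
        have : 0 ≤ (gN maps : Int) := by positivity
        omega
      have h5 : m.toNat * n.toNat = gN maps * gM maps := by
        rw [h2, h3, Nat.mul_comm]
      simp only [List.length_singleton]
      omega)
  set r := dfsLoop maps n m (m.toNat * n.toNat + 1) [(sx, sy)] (msetA vis sx sy) [(sx, sy)]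
    with hr
  obtain ⟨hsh', hVeq, hndr, hlocr⟩ := hspec
  have hres : dfsA maps vis [(sx, sy)] n m =
      (r.1, r.2.foldl (fun a p => a + digitAt maps p.1 p.2) 0) := rfl
  rw [hres]
  refine ⟨hsh', by simpa using hVeq, ?_⟩
  have hdisj : ∀ p, Reach maps (sx, sy) p → p ∉ visSet maps vis :=
    fun p h => reach_disjoint hcl hnot h
  have htf : r.2.toFinset = reachF maps (sx, sy) := by
    ext p
    rw [List.mem_toFinset, hlocr p, hVeq, Finset.mem_union, mem_reachF]
    constructor
    · rintro ⟨h1 | h1, h2⟩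
      · exact absurd h1 h2
      · exact h1
    · intro h
      exact ⟨Or.inr h, hdisj p h⟩
  calc r.2.foldl (fun a p => a + digitAt maps p.1 p.2) 0
      = 0 + (r.2.map (fun p => digitAt maps p.1 p.2)).sum :=
        PySem.List.foldl_add _ _ _
    _ = (r.2.toFinset).sum (fun p => digitAt maps p.1 p.2) := by
        rw [zero_add, List.sum_toFinset _ hndr]
    _ = compSum maps (sx, sy) := by rw [htf]; rfl

-- ===== union-find machinery (B side) =====

lemma reach_trans {maps : List String} {a b c : Int × Int}
    (h1 : Reach maps a b) (h2 : Reach maps b c) : Reach maps a c := by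
  induction h2 with
  | refl _ => exact h1
  | tail _ hadj ih => exact Reach.tail ih hadj

lemma reach_symm {maps : List String} {a b : Int × Int}
    (h : Reach maps a b) : Reach maps b a := by
  induction h with
  | refl h => exact Reach.refl _ h
  | tail _ hadj ih =>
    exact reach_trans (Reach.tail (Reach.refl _ hadj.2.1) (adj_symm hadj)) ih

-- flattened index y*n + x of a cell, and its inverse
def idxP (maps : List String) (c : Int × Int) : Int := c.2 * (gN maps : Int) + c.1

def cellOf (maps : List String) (a : Int) : Int × Int :=
  (a % (gN maps : Int), a / (gN maps : Int))

lemma idxP_bounds {maps : List String} {c : Int × Int} (hg : GoodP maps c) :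
    0 ≤ idxP maps c ∧ idxP maps c < ((gN maps * gM maps : Nat) : Int) := by
  obtain ⟨h1, h2, h3, h4, _⟩ := hg
  unfold idxP
  constructor
  · nlinarith
  · push_cast
    nlinarith

lemma cellOf_idxP {maps : List String} {c : Int × Int} (hg : GoodP maps c) :
    cellOf maps (idxP maps c) = c := by
  obtain ⟨h1, h2, h3, h4, _⟩ := hg
  have hn : (0 : Int) < (gN maps : Int) := by omega
  unfold cellOf idxP
  have he : c.2 * (gN maps : Int) + c.1 = c.1 + (gN maps : Int) * c.2 := by ring
  rw [he, Int.add_mul_emod_self_left, Int.emod_eq_of_lt h1 h2,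
    Int.add_mul_ediv_left _ _ (by omega : (gN maps : Int) ≠ 0),
    Int.ediv_eq_zero_of_lt h1 h2]
  simp

-- "a and b are indices of cells of the same island (or equal)"
def EqvI (maps : List String) (a b : Int) : Prop :=
  a = b ∨ Reach maps (cellOf maps a) (cellOf maps b)

lemma eqvI_refl (maps : List String) (a : Int) : EqvI maps a a := Or.inl rfl

lemma eqvI_symm {maps : List String} {a b : Int} (h : EqvI maps a b) : EqvI maps b a := by
  rcases h with h | h
  · exact Or.inl h.symm
  · exact Or.inr (reach_symm h)

lemma eqvI_trans {maps : List String} {a b c : Int}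
    (h1 : EqvI maps a b) (h2 : EqvI maps b c) : EqvI maps a c := by
  rcases h1 with h1 | h1
  · rw [h1]; exact h2
  · rcases h2 with h2 | h2
    · rw [← h2]; exact Or.inr h1
    · exact Or.inr (reach_trans h1 h2)

-- parent-array invariant: entries point downwards, within the same island
def PInv (maps : List String) (p : List Int) : Prop :=
  p.length = gN maps * gM maps ∧
  ∀ k : Nat, k < p.length →
    0 ≤ p.getD k 0 ∧ p.getD k 0 ≤ (k : Int) ∧ EqvI maps (k : Int) (p.getD k 0)

lemma getD_irrel {p : List Int} {k : Nat} (h : k < p.length) (d d' : Int) :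
    p.getD k d = p.getD k d' := by
  rw [List.getD_eq_getElem _ _ h, List.getD_eq_getElem _ _ h]

lemma findR_spec {maps : List String} {p : List Int} (hinv : PInv maps p) :
    ∀ (kn : Nat) (i : Int), i.toNat = kn → 0 ≤ i → i < ((gN maps * gM maps : Nat) : Int) →
    0 ≤ findB p i ∧ findB p i ≤ i ∧ EqvI maps i (findB p i) ∧
      p.getD (findB p i).toNat 0 = findB p i ∧
      ∀ f, i.toNat < f → findR p f i = findB p i := by
  intro kn
  induction kn using Nat.strong_induction_on with
  | _ kn ih =>
    intro i hkn h0 hN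
    have hlen : i.toNat < p.length := by rw [hinv.1]; omega
    have hstep : findB p i = if p.getD i.toNat i = i then i else findR p i.toNat (p.getD i.toNat i) := rfl
    have hji : p.getD i.toNat i = p.getD i.toNat 0 := getD_irrel hlen _ _
    obtain ⟨hj0, hjle, hjEq⟩ := hinv.2 i.toNat hlen
    have hcast : ((i.toNat : Nat) : Int) = i := by omega
    rw [hcast] at hjle hjEq
    by_cases hfix : p.getD i.toNat i = i
    · have hB : findB p i = i := by rw [hstep, if_pos hfix]
      refine ⟨by omega, by omega, by rw [hB]; exact eqvI_refl _ _, ?_, ?_⟩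
      · rw [hB, ← hji]; exact hfix
      · intro f hf
        match f, hf with
        | f' + 1, _ =>
          show (if p.getD i.toNat i = i then i else findR p f' (p.getD i.toNat i)) = findB p i
          rw [if_pos hfix, hB]
    · set j := p.getD i.toNat 0 with hjdef
      have hjne : j ≠ i := fun h => hfix (by rw [hji, h])
      have hjlt : j < i := lt_of_le_of_ne hjle hjne
      have hjN : j < ((gN maps * gM maps : Nat) : Int) := by omega
      have hjnat : j.toNat < kn := by omega
      obtain ⟨ih0, ihle, ihEq, ihroot, ihstab⟩ := ih j.toNat hjnat j rfl hj0 hjN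
      have hB : findB p i = findB p j := by
        rw [hstep, if_neg hfix, hji]
        exact ihstab i.toNat (by omega)
      refine ⟨by omega, by omega, ?_, by rw [hB]; exact ihroot, ?_⟩
      · rw [hB]; exact eqvI_trans hjEq ihEq
      · intro f hf
        match f, hf with
        | f' + 1, hf =>
          show (if p.getD i.toNat i = i then i else findR p f' (p.getD i.toNat i)) = findB p i
          rw [if_neg hfix, hji, hB]
          exact ihstab f' (by omega)

lemma find_props {maps : List String} {p : List Int} (hinv : PInv maps p) {i : Int}
    (h0 : 0 ≤ i) (hN : i < ((gN maps * gM maps : Nat) : Int)) :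
    0 ≤ findB p i ∧ findB p i ≤ i ∧ EqvI maps i (findB p i) ∧
      p.getD (findB p i).toNat 0 = findB p i := by
  obtain ⟨a, b, c, d, _⟩ := findR_spec hinv i.toNat i rfl h0 hN
  exact ⟨a, b, c, d⟩

lemma find_root_fix {p : List Int} {r : Int} (_h0 : 0 ≤ r) (hlen : r.toNat < p.length)
    (hr : p.getD r.toNat 0 = r) : findB p r = r := by
  show (if p.getD r.toNat r = r then r else findR p r.toNat (p.getD r.toNat r)) = r
  rw [getD_irrel hlen r 0, if_pos hr]

-- one-step recursion equation for findB (fuel is invisible once PInv holds)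
lemma find_step {maps : List String} {p : List Int} (hinv : PInv maps p) {i : Int}
    (h0 : 0 ≤ i) (hN : i < ((gN maps * gM maps : Nat) : Int)) :
    findB p i = if p.getD i.toNat 0 = i then i else findB p (p.getD i.toNat 0) := by
  have hlen : i.toNat < p.length := by rw [hinv.1]; omega
  have hji : p.getD i.toNat i = p.getD i.toNat 0 := getD_irrel hlen _ _
  have hstep : findB p i = if p.getD i.toNat i = i then i else findR p i.toNat (p.getD i.toNat i) := rfl
  by_cases hfix : p.getD i.toNat 0 = i
  · rw [hstep, hji, if_pos hfix, if_pos hfix]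
  · obtain ⟨hj0, hjle, _⟩ := hinv.2 i.toNat hlen
    have hcast : ((i.toNat : Nat) : Int) = i := by omega
    rw [hcast] at hjle
    have hjlt : p.getD i.toNat 0 < i := lt_of_le_of_ne hjle hfix
    obtain ⟨_, _, _, _, hstab⟩ :=
      findR_spec hinv (p.getD i.toNat 0).toNat (p.getD i.toNat 0) rfl hj0 (by omega)
    rw [hstep, hji, if_neg hfix, if_neg hfix]
    exact hstab i.toNat (by omega)

lemma PInv_set {maps : List String} {p : List Int} (hinv : PInv maps p) {ra rb : Int}
    (hra : 0 ≤ ra) (hrarb : ra < rb) (_hrbN : rb < ((gN maps * gM maps : Nat) : Int))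
    (hEq : EqvI maps rb ra) : PInv maps (p.set rb.toNat ra) := by
  refine ⟨by rw [List.length_set]; exact hinv.1, ?_⟩
  intro k hk
  rw [List.length_set] at hk
  by_cases hkr : k = rb.toNat
  · subst hkr
    have : (p.set rb.toNat ra).getD rb.toNat 0 = ra := by
      rw [List.getD_eq_getElem _ _ (by rw [List.length_set]; exact hk)]
      simp [List.getElem_set_self]
    rw [this]
    have hcast : ((rb.toNat : Nat) : Int) = rb := by omega
    exact ⟨hra, by omega, by rw [hcast]; exact hEq⟩
  · have : (p.set rb.toNat ra).getD k 0 = p.getD k 0 := by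
      rw [List.getD_eq_getElem _ _ (by rw [List.length_set]; exact hk),
        List.getD_eq_getElem _ _ hk]
      rw [List.getElem_set_ne (by omega)]
    rw [this]
    exact hinv.2 k hk

lemma find_set {maps : List String} {p : List Int} (hinv : PInv maps p) {ra rb : Int}
    (hra : 0 ≤ ra) (hrarb : ra < rb) (hrbN : rb < ((gN maps * gM maps : Nat) : Int))
    (hrootA : p.getD ra.toNat 0 = ra) (hrootB : p.getD rb.toNat 0 = rb)
    (hEq : EqvI maps rb ra) :
    ∀ (kn : Nat) (i : Int), i.toNat = kn → 0 ≤ i → i < ((gN maps * gM maps : Nat) : Int) →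
    findB (p.set rb.toNat ra) i = if findB p i = rb then ra else findB p i := by
  have hinv' := PInv_set hinv hra hrarb hrbN hEq
  have hlenB : rb.toNat < p.length := by rw [hinv.1]; omega
  have hlenA : ra.toNat < p.length := by rw [hinv.1]; omega
  intro kn
  induction kn using Nat.strong_induction_on with
  | _ kn ih =>
    intro i hkn h0 hN
    have hleni : i.toNat < p.length := by rw [hinv.1]; omega
    by_cases hirb : i = rb
    · rw [hirb]
      have hget : (p.set rb.toNat ra).getD rb.toNat 0 = ra := by
        rw [List.getD_eq_getElem _ _ (by rw [List.length_set]; exact hlenB)]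
        simp [List.getElem_set_self]
      have hfb : findB p rb = rb := find_root_fix (by omega) hlenB hrootB
      rw [find_step hinv' (by omega) (by omega), hget, if_neg (by omega), hfb, if_pos rfl]
      -- findB p' ra = ra : ra is still a root in p'
      have hgetA : (p.set rb.toNat ra).getD ra.toNat 0 = ra := by
        rw [List.getD_eq_getElem _ _ (by rw [List.length_set]; exact hlenA)]
        rw [List.getElem_set_ne (by omega)]
        rw [← List.getD_eq_getElem _ 0 hlenA]
        exact hrootA
      exact find_root_fix hra (by rw [List.length_set]; exact hlenA) hgetA
    · have hget : (p.set rb.toNat ra).getD i.toNat 0 = p.getD i.toNat 0 := by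
        rw [List.getD_eq_getElem _ _ (by rw [List.length_set]; exact hleni),
          List.getD_eq_getElem _ _ hleni]
        rw [List.getElem_set_ne (by omega)]
      set j := p.getD i.toNat 0 with hjdef
      obtain ⟨hj0, hjle, _⟩ := hinv.2 i.toNat hleni
      have hcast : ((i.toNat : Nat) : Int) = i := by omega
      rw [hcast] at hjle
      by_cases hfix : j = i
      · rw [find_step hinv' h0 hN, hget, if_pos hfix,
          find_step hinv h0 hN, if_pos hfix, if_neg hirb]
      · have hjlt : j < i := lt_of_le_of_ne hjle hfix
        rw [find_step hinv' h0 hN, hget, if_neg hfix,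
          find_step hinv h0 hN, if_neg hfix]
        exact ih j.toNat (by omega) j rfl hj0 (by omega)

lemma unionB_PInv {maps : List String} {p : List Int} (hinv : PInv maps p) {a b : Int}
    (ha0 : 0 ≤ a) (haN : a < ((gN maps * gM maps : Nat) : Int))
    (hb0 : 0 ≤ b) (hbN : b < ((gN maps * gM maps : Nat) : Int))
    (hab : EqvI maps a b) : PInv maps (unionB p a b) := by
  obtain ⟨hra0, hrale, hraEq, hraRoot⟩ := find_props hinv ha0 haN
  obtain ⟨hrb0, hrble, hrbEq, hrbRoot⟩ := find_props hinv hb0 hbN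
  show PInv maps (if findB p a < findB p b then p.set (findB p b).toNat (findB p a)
    else if findB p b < findB p a then p.set (findB p a).toNat (findB p b) else p)
  split_ifs with h1 h2
  · exact PInv_set hinv hra0 h1 (by omega)
      (eqvI_trans (eqvI_symm hrbEq) (eqvI_trans (eqvI_symm hab) hraEq))
  · exact PInv_set hinv hrb0 h2 (by omega)
      (eqvI_trans (eqvI_symm hraEq) (eqvI_trans hab hrbEq))
  · exact hinv

lemma unionB_find {maps : List String} {p : List Int} (hinv : PInv maps p) {a b : Int}
    (ha0 : 0 ≤ a) (haN : a < ((gN maps * gM maps : Nat) : Int))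
    (hb0 : 0 ≤ b) (hbN : b < ((gN maps * gM maps : Nat) : Int))
    (hab : EqvI maps a b) :
    ∀ i : Int, 0 ≤ i → i < ((gN maps * gM maps : Nat) : Int) →
    findB (unionB p a b) i =
      if findB p i = findB p a ∨ findB p i = findB p b
      then min (findB p a) (findB p b) else findB p i := by
  intro i h0 hN
  obtain ⟨hra0, hrale, hraEq, hraRoot⟩ := find_props hinv ha0 haN
  obtain ⟨hrb0, hrble, hrbEq, hrbRoot⟩ := find_props hinv hb0 hbN
  show findB (if findB p a < findB p b then p.set (findB p b).toNat (findB p a)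
    else if findB p b < findB p a then p.set (findB p a).toNat (findB p b) else p) i = _
  by_cases h1 : findB p a < findB p b
  · rw [if_pos h1, find_set hinv hra0 h1 (by omega) hraRoot hrbRoot
      (eqvI_trans (eqvI_symm hrbEq) (eqvI_trans (eqvI_symm hab) hraEq)) i.toNat i rfl h0 hN]
    split_ifs <;> omega
  · rw [if_neg h1]
    by_cases h2 : findB p b < findB p a
    · rw [if_pos h2, find_set hinv hrb0 h2 (by omega) hrbRoot hraRoot
        (eqvI_trans (eqvI_symm hraEq) (eqvI_trans hab hrbEq)) i.toNat i rfl h0 hN]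
      split_ifs <;> omega
    · rw [if_neg h2]
      split_ifs <;> omega

lemma unionB_pres {maps : List String} {p : List Int} (hinv : PInv maps p) {a b : Int}
    (ha0 : 0 ≤ a) (haN : a < ((gN maps * gM maps : Nat) : Int))
    (hb0 : 0 ≤ b) (hbN : b < ((gN maps * gM maps : Nat) : Int))
    (hab : EqvI maps a b) {i j : Int}
    (hi0 : 0 ≤ i) (hiN : i < ((gN maps * gM maps : Nat) : Int))
    (hj0 : 0 ≤ j) (hjN : j < ((gN maps * gM maps : Nat) : Int))
    (h : findB p i = findB p j) :
    findB (unionB p a b) i = findB (unionB p a b) j := by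
  rw [unionB_find hinv ha0 haN hb0 hbN hab i hi0 hiN,
    unionB_find hinv ha0 haN hb0 hbN hab j hj0 hjN, h]

lemma unionB_conn {maps : List String} {p : List Int} (hinv : PInv maps p) {a b : Int}
    (ha0 : 0 ≤ a) (haN : a < ((gN maps * gM maps : Nat) : Int))
    (hb0 : 0 ≤ b) (hbN : b < ((gN maps * gM maps : Nat) : Int))
    (hab : EqvI maps a b) :
    findB (unionB p a b) a = findB (unionB p a b) b := by
  rw [unionB_find hinv ha0 haN hb0 hbN hab a ha0 haN,
    unionB_find hinv ha0 haN hb0 hbN hab b hb0 hbN,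
    if_pos (Or.inl rfl), if_pos (Or.inr rfl)]

-- root-equality is preserved by later unions
def PresF (maps : List String) (p q : List Int) : Prop :=
  ∀ i : Int, 0 ≤ i → i < ((gN maps * gM maps : Nat) : Int) →
  ∀ j : Int, 0 ≤ j → j < ((gN maps * gM maps : Nat) : Int) →
  findB p i = findB p j → findB q i = findB q j

lemma presF_refl (maps : List String) (p : List Int) : PresF maps p p :=
  fun _ _ _ _ _ _ h => h

lemma presF_trans {maps : List String} {p q r : List Int}
    (h1 : PresF maps p q) (h2 : PresF maps q r) : PresF maps p r :=
  fun i hi0 hiN j hj0 hjN h => h2 i hi0 hiN j hj0 hjN (h1 i hi0 hiN j hj0 hjN h)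

lemma good_of_cell {maps : List String} (hpre : Pre_solution maps) {x y : Int}
    (hx : 0 ≤ x) (hy : 0 ≤ y) (hy2 : y < (gM maps : Int))
    (hc : cellAt maps x y ≠ 'X') : GoodP maps (x, y) :=
  ⟨hx, cell_lt_n hpre hx hy hy2 hc, hy, hy2, hc⟩

lemma eqvI_adj {maps : List String} {u v : Int × Int} (hadj : AdjP maps u v) :
    EqvI maps (idxP maps u) (idxP maps v) := by
  refine Or.inr ?_
  rw [cellOf_idxP hadj.1, cellOf_idxP hadj.2.1]
  exact Reach.tail (Reach.refl _ hadj.1) hadj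

-- a single conditional union of two adjacent good cells
lemma ite_union_spec {maps : List String} {p : List Int} (hinv : PInv maps p)
    (cond : Prop) [Decidable cond] {u v : Int × Int}
    (hadj : cond → AdjP maps u v) :
    PInv maps (if cond then unionB p (idxP maps u) (idxP maps v) else p) ∧
    PresF maps p (if cond then unionB p (idxP maps u) (idxP maps v) else p) ∧
    (cond → findB (if cond then unionB p (idxP maps u) (idxP maps v) else p) (idxP maps u) =
      findB (if cond then unionB p (idxP maps u) (idxP maps v) else p) (idxP maps v)) := by
  by_cases hc : cond
  · rw [if_pos hc]
    have hbu := idxP_bounds (hadj hc).1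
    have hbv := idxP_bounds (hadj hc).2.1
    have hEq := eqvI_adj (hadj hc)
    refine ⟨unionB_PInv hinv hbu.1 hbu.2 hbv.1 hbv.2 hEq, ?_, ?_⟩
    · intro i hi0 hiN j hj0 hjN h
      exact unionB_pres hinv hbu.1 hbu.2 hbv.1 hbv.2 hEq hi0 hiN hj0 hjN h
    · intro _
      exact unionB_conn hinv hbu.1 hbu.2 hbv.1 hbv.2 hEq
  · rw [if_neg hc]
    exact ⟨hinv, presF_refl _ _, fun h => absurd h hc⟩

-- the two halves of the pass-1 loop body, and the body itself
def uR (maps : List String) (n _m y : Int) (p : List Int) (x : Int) : List Int :=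
  if x + 1 < (((maps.getD y.toNat "").toList.length : Int)) ∧ cellAt maps (x + 1) y ≠ 'X'
  then unionB p (y * n + x) (y * n + x + 1) else p

def uD (maps : List String) (n m y : Int) (p : List Int) (x : Int) : List Int :=
  if y + 1 < m ∧ x < (((maps.getD (y + 1).toNat "").toList.length : Int)) ∧
      cellAt maps x (y + 1) ≠ 'X'
  then unionB p (y * n + x) ((y + 1) * n + x) else p

def uStep (maps : List String) (n m y : Int) (p : List Int) (x : Int) : List Int :=
  if cellAt maps x y ≠ 'X' then uD maps n m y (uR maps n m y p x) x else p

lemma pass1_eq (maps : List String) (n m : Int) :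
    pass1 maps n m =
      (PySem.List.pyRange 0 m 1).foldl (fun p y =>
        (PySem.List.pyRange 0 (((maps.getD y.toNat "").toList.length : Int)) 1).foldl
          (uStep maps n m y) p)
        (PySem.List.pyRange 0 (n * m) 1) := rfl

lemma idx_self (maps : List String) (x y : Int) :
    y * ((gN maps : Nat) : Int) + x = idxP maps (x, y) := rfl

lemma idx_right (maps : List String) (x y : Int) :
    y * ((gN maps : Nat) : Int) + x + 1 = idxP maps (x + 1, y) := by
  unfold idxP; ring

lemma idx_down (maps : List String) (x y : Int) :
    (y + 1) * ((gN maps : Nat) : Int) + x = idxP maps (x, y + 1) := rfl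

-- the right-guard of the pass-1 body is exactly "both cells are good"
lemma guardR_iff {maps : List String} (hpre : Pre_solution maps) {x y : Int}
    (hx : 0 ≤ x) (hy : 0 ≤ y) (hy2 : y < (gM maps : Int)) (hc : cellAt maps x y ≠ 'X') :
    (x + 1 < (((maps.getD y.toNat "").toList.length : Int)) ∧ cellAt maps (x + 1) y ≠ 'X') ↔
      (GoodP maps (x, y) ∧ GoodP maps (x + 1, y)) := by
  constructor
  · rintro ⟨h1, h2⟩
    exact ⟨good_of_cell hpre hx hy hy2 hc, good_of_cell hpre (by omega) hy hy2 h2⟩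
  · rintro ⟨_, hg⟩
    refine ⟨?_, hg.2.2.2.2⟩
    have := cell_exists (show cellAt maps (x + 1) y ≠ 'X' from hg.2.2.2.2)
    omega

lemma guardD_iff {maps : List String} (hpre : Pre_solution maps) {x y : Int}
    (hx : 0 ≤ x) (hy : 0 ≤ y) (hy2 : y < (gM maps : Int)) (hc : cellAt maps x y ≠ 'X') :
    (y + 1 < (gM maps : Int) ∧ x < (((maps.getD (y + 1).toNat "").toList.length : Int)) ∧
        cellAt maps x (y + 1) ≠ 'X') ↔
      (GoodP maps (x, y) ∧ GoodP maps (x, y + 1)) := by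
  constructor
  · rintro ⟨h1, h2, h3⟩
    exact ⟨good_of_cell hpre hx hy hy2 hc, good_of_cell hpre hx (by omega) h1 h3⟩
  · rintro ⟨_, hg⟩
    refine ⟨hg.2.2.2.1, ?_, hg.2.2.2.2⟩
    have := cell_exists (show cellAt maps x (y + 1) ≠ 'X' from hg.2.2.2.2)
    omega

lemma adj_right_of {maps : List String} {x y : Int}
    (h1 : GoodP maps (x, y)) (h2 : GoodP maps (x + 1, y)) : AdjP maps (x, y) (x + 1, y) :=
  ⟨h1, h2, Or.inl rfl⟩

lemma adj_down_of {maps : List String} {x y : Int}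
    (h1 : GoodP maps (x, y)) (h2 : GoodP maps (x, y + 1)) : AdjP maps (x, y) (x, y + 1) :=
  ⟨h1, h2, Or.inr (Or.inr (Or.inl rfl))⟩

lemma uStep_spec {maps : List String} (hpre : Pre_solution maps) {p : List Int}
    (hinv : PInv maps p) {y x : Int} (hy0 : 0 ≤ y) (hym : y < (gM maps : Int)) (hx0 : 0 ≤ x) :
    PInv maps (uStep maps ((gN maps : Nat) : Int) ((gM maps : Nat) : Int) y p x) ∧
    PresF maps p (uStep maps ((gN maps : Nat) : Int) ((gM maps : Nat) : Int) y p x) ∧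
    (GoodP maps (x, y) → GoodP maps (x + 1, y) →
      findB (uStep maps ((gN maps : Nat) : Int) ((gM maps : Nat) : Int) y p x)
          (idxP maps (x, y)) =
        findB (uStep maps ((gN maps : Nat) : Int) ((gM maps : Nat) : Int) y p x)
          (idxP maps (x + 1, y))) ∧
    (GoodP maps (x, y) → GoodP maps (x, y + 1) →
      findB (uStep maps ((gN maps : Nat) : Int) ((gM maps : Nat) : Int) y p x)
          (idxP maps (x, y)) =
        findB (uStep maps ((gN maps : Nat) : Int) ((gM maps : Nat) : Int) y p x)
          (idxP maps (x, y + 1))) := by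
  by_cases hc : cellAt maps x y ≠ 'X'
  · have hstep : uStep maps ((gN maps : Nat) : Int) ((gM maps : Nat) : Int) y p x =
        uD maps _ _ y (uR maps _ _ y p x) x := if_pos hc
    have huR : uR maps ((gN maps : Nat) : Int) ((gM maps : Nat) : Int) y p x =
        (if (x + 1 < (((maps.getD y.toNat "").toList.length : Int)) ∧
            cellAt maps (x + 1) y ≠ 'X')
         then unionB p (idxP maps (x, y)) (idxP maps (x + 1, y)) else p) := by
      unfold uR
      rw [idx_right, idx_self]
    obtain ⟨hinv1, hpres1, hconn1⟩ :=
      ite_union_spec hinv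
        (x + 1 < (((maps.getD y.toNat "").toList.length : Int)) ∧ cellAt maps (x + 1) y ≠ 'X')
        (fun h => adj_right_of ((guardR_iff hpre hx0 hy0 hym hc).1 h).1
          ((guardR_iff hpre hx0 hy0 hym hc).1 h).2)
    rw [← huR] at hinv1 hpres1 hconn1
    have huD : uD maps ((gN maps : Nat) : Int) ((gM maps : Nat) : Int) y
        (uR maps ((gN maps : Nat) : Int) ((gM maps : Nat) : Int) y p x) x =
        (if (y + 1 < ((gM maps : Nat) : Int) ∧
            x < (((maps.getD (y + 1).toNat "").toList.length : Int)) ∧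
            cellAt maps x (y + 1) ≠ 'X')
         then unionB (uR maps ((gN maps : Nat) : Int) ((gM maps : Nat) : Int) y p x)
           (idxP maps (x, y)) (idxP maps (x, y + 1))
         else uR maps ((gN maps : Nat) : Int) ((gM maps : Nat) : Int) y p x) := by
      unfold uD
      rw [idx_down, idx_self]
    obtain ⟨hinv2, hpres2, hconn2⟩ :=
      ite_union_spec hinv1
        (y + 1 < ((gM maps : Nat) : Int) ∧
          x < (((maps.getD (y + 1).toNat "").toList.length : Int)) ∧
          cellAt maps x (y + 1) ≠ 'X')
        (fun h => adj_down_of ((guardD_iff hpre hx0 hy0 hym hc).1 h).1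
          ((guardD_iff hpre hx0 hy0 hym hc).1 h).2)
    rw [← huD] at hinv2 hpres2 hconn2
    rw [hstep]
    refine ⟨hinv2, presF_trans hpres1 hpres2, ?_, ?_⟩
    · intro hg1 hg2
      have hguard := (guardR_iff hpre hx0 hy0 hym hc).2 ⟨hg1, hg2⟩
      have hb1 := idxP_bounds hg1
      have hb2 := idxP_bounds hg2
      exact hpres2 _ hb1.1 hb1.2 _ hb2.1 hb2.2 (hconn1 hguard)
    · intro hg1 hg2
      exact hconn2 ((guardD_iff hpre hx0 hy0 hym hc).2 ⟨hg1, hg2⟩)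
  · have hstep : uStep maps ((gN maps : Nat) : Int) ((gM maps : Nat) : Int) y p x = p :=
      if_neg hc
    rw [hstep]
    exact ⟨hinv, presF_refl _ _,
      fun hg _ => absurd hg.2.2.2.2 (by simpa using hc),
      fun hg _ => absurd hg.2.2.2.2 (by simpa using hc)⟩

lemma row1_spec {maps : List String} (hpre : Pre_solution maps) {y : Int}
    (hy0 : 0 ≤ y) (hym : y < (gM maps : Int)) :
    ∀ (xs : List Int), (∀ x ∈ xs, 0 ≤ x) → ∀ (p : List Int), PInv maps p →
    PInv maps (xs.foldl (uStep maps ((gN maps : Nat) : Int) ((gM maps : Nat) : Int) y) p) ∧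
    PresF maps p (xs.foldl (uStep maps ((gN maps : Nat) : Int) ((gM maps : Nat) : Int) y) p) ∧
    ∀ x ∈ xs,
      (GoodP maps (x, y) → GoodP maps (x + 1, y) →
        findB (xs.foldl (uStep maps ((gN maps : Nat) : Int) ((gM maps : Nat) : Int) y) p)
            (idxP maps (x, y)) =
          findB (xs.foldl (uStep maps ((gN maps : Nat) : Int) ((gM maps : Nat) : Int) y) p)
            (idxP maps (x + 1, y))) ∧
      (GoodP maps (x, y) → GoodP maps (x, y + 1) →
        findB (xs.foldl (uStep maps ((gN maps : Nat) : Int) ((gM maps : Nat) : Int) y) p)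
            (idxP maps (x, y)) =
          findB (xs.foldl (uStep maps ((gN maps : Nat) : Int) ((gM maps : Nat) : Int) y) p)
            (idxP maps (x, y + 1))) := by
  intro xs
  induction xs with
  | nil =>
    intro _ p hinv
    exact ⟨hinv, presF_refl _ _, by simp⟩
  | cons a t ih =>
    intro hxs p hinv
    obtain ⟨hinv1, hpres1, hconnR, hconnD⟩ :=
      uStep_spec hpre hinv hy0 hym (hxs a List.mem_cons_self)
    obtain ⟨hinv2, hpres2, hconns⟩ :=
      ih (fun x hx => hxs x (List.mem_cons_of_mem _ hx))
        (uStep maps ((gN maps : Nat) : Int) ((gM maps : Nat) : Int) y p a) hinv1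
    rw [List.foldl_cons]
    refine ⟨hinv2, presF_trans hpres1 hpres2, ?_⟩
    intro x hx
    rcases List.mem_cons.1 hx with rfl | hx'
    · constructor
      · intro hg1 hg2
        have hb1 := idxP_bounds hg1
        have hb2 := idxP_bounds hg2
        exact hpres2 _ hb1.1 hb1.2 _ hb2.1 hb2.2 (hconnR hg1 hg2)
      · intro hg1 hg2
        have hb1 := idxP_bounds hg1
        have hb2 := idxP_bounds hg2
        exact hpres2 _ hb1.1 hb1.2 _ hb2.1 hb2.2 (hconnD hg1 hg2)
    · exact hconns x hx'

lemma grid1_spec {maps : List String} (hpre : Pre_solution maps) :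
    ∀ (ys : List Int), (∀ y ∈ ys, 0 ≤ y ∧ y < (gM maps : Int)) → ∀ (p : List Int), PInv maps p →
    PInv maps (ys.foldl (fun p y =>
      (PySem.List.pyRange 0 (((maps.getD y.toNat "").toList.length : Int)) 1).foldl
        (uStep maps ((gN maps : Nat) : Int) ((gM maps : Nat) : Int) y) p) p) ∧
    PresF maps p (ys.foldl (fun p y =>
      (PySem.List.pyRange 0 (((maps.getD y.toNat "").toList.length : Int)) 1).foldl
        (uStep maps ((gN maps : Nat) : Int) ((gM maps : Nat) : Int) y) p) p) ∧
    ∀ y ∈ ys, ∀ x ∈ PySem.List.pyRange 0 (((maps.getD y.toNat "").toList.length : Int)) 1,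
      (GoodP maps (x, y) → GoodP maps (x + 1, y) →
        findB (ys.foldl (fun p y =>
            (PySem.List.pyRange 0 (((maps.getD y.toNat "").toList.length : Int)) 1).foldl
              (uStep maps ((gN maps : Nat) : Int) ((gM maps : Nat) : Int) y) p) p)
            (idxP maps (x, y)) =
          findB (ys.foldl (fun p y =>
            (PySem.List.pyRange 0 (((maps.getD y.toNat "").toList.length : Int)) 1).foldl
              (uStep maps ((gN maps : Nat) : Int) ((gM maps : Nat) : Int) y) p) p)
            (idxP maps (x + 1, y))) ∧
      (GoodP maps (x, y) → GoodP maps (x, y + 1) →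
        findB (ys.foldl (fun p y =>
            (PySem.List.pyRange 0 (((maps.getD y.toNat "").toList.length : Int)) 1).foldl
              (uStep maps ((gN maps : Nat) : Int) ((gM maps : Nat) : Int) y) p) p)
            (idxP maps (x, y)) =
          findB (ys.foldl (fun p y =>
            (PySem.List.pyRange 0 (((maps.getD y.toNat "").toList.length : Int)) 1).foldl
              (uStep maps ((gN maps : Nat) : Int) ((gM maps : Nat) : Int) y) p) p)
            (idxP maps (x, y + 1))) := by
  intro ys
  induction ys with
  | nil =>
    intro _ p hinv
    exact ⟨hinv, presF_refl _ _, by simp⟩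
  | cons a t ih =>
    intro hys p hinv
    obtain ⟨ha0, ham⟩ := hys a List.mem_cons_self
    obtain ⟨hinv1, hpres1, hconns1⟩ :=
      row1_spec hpre ha0 ham
        (PySem.List.pyRange 0 (((maps.getD a.toNat "").toList.length : Int)) 1)
        (fun x hx => ((PySem.List.mem_pyRange_one).1 hx).1) p hinv
    obtain ⟨hinv2, hpres2, hconns2⟩ :=
      ih (fun y hy => hys y (List.mem_cons_of_mem _ hy)) _ hinv1
    rw [List.foldl_cons]
    refine ⟨hinv2, presF_trans hpres1 hpres2, ?_⟩
    intro y hy x hx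
    rcases List.mem_cons.1 hy with rfl | hy'
    · obtain ⟨hcR, hcD⟩ := hconns1 x hx
      constructor
      · intro hg1 hg2
        have hb1 := idxP_bounds hg1
        have hb2 := idxP_bounds hg2
        exact hpres2 _ hb1.1 hb1.2 _ hb2.1 hb2.2 (hcR hg1 hg2)
      · intro hg1 hg2
        have hb1 := idxP_bounds hg1
        have hb2 := idxP_bounds hg2
        exact hpres2 _ hb1.1 hb1.2 _ hb2.1 hb2.2 (hcD hg1 hg2)
    · exact hconns2 y hy' x hx

lemma PInv_init (maps : List String) :
    PInv maps (PySem.List.pyRange 0 (((gN maps : Nat) : Int) * ((gM maps : Nat) : Int)) 1) := by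
  have hlen : (PySem.List.pyRange 0 (((gN maps : Nat) : Int) * ((gM maps : Nat) : Int)) 1).length
      = gN maps * gM maps := by
    rw [PySem.List.length_pyRange_one]
    have : ((gN maps : Nat) : Int) * ((gM maps : Nat) : Int) = ((gN maps * gM maps : Nat) : Int) := by
      push_cast; ring
    rw [this]
    omega
  refine ⟨hlen, ?_⟩
  intro k hk
  rw [hlen] at hk
  have hget : (PySem.List.pyRange 0 (((gN maps : Nat) : Int) * ((gM maps : Nat) : Int)) 1).getD k 0
      = (k : Int) := by
    rw [List.getD_eq_getElem _ _ (by rw [hlen]; exact hk)]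
    rw [PySem.List.getElem_pyRange_one]
    omega
  rw [hget]
  exact ⟨by omega, le_refl _, eqvI_refl _ _⟩

lemma pass1_spec {maps : List String} (hpre : Pre_solution maps) :
    PInv maps (pass1 maps ((gN maps : Nat) : Int) ((gM maps : Nat) : Int)) ∧
    ∀ u v, AdjP maps u v →
      findB (pass1 maps ((gN maps : Nat) : Int) ((gM maps : Nat) : Int)) (idxP maps u) =
        findB (pass1 maps ((gN maps : Nat) : Int) ((gM maps : Nat) : Int)) (idxP maps v) := by
  rw [pass1_eq]
  obtain ⟨hinv, _, hconns⟩ :=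
    grid1_spec hpre (PySem.List.pyRange 0 ((gM maps : Nat) : Int) 1)
      (fun y hy => (PySem.List.mem_pyRange_one).1 hy) _ (PInv_init maps)
  refine ⟨hinv, ?_⟩
  have hedge : ∀ x y : Int, GoodP maps (x, y) →
      x ∈ PySem.List.pyRange 0 (((maps.getD y.toNat "").toList.length : Int)) 1 ∧
      y ∈ PySem.List.pyRange 0 ((gM maps : Nat) : Int) 1 := by
    intro x y hg
    have hce := cell_exists (show cellAt maps x y ≠ 'X' from hg.2.2.2.2)
    refine ⟨(PySem.List.mem_pyRange_one).2 ⟨hg.1, by omega⟩,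
      (PySem.List.mem_pyRange_one).2 ⟨hg.2.2.1, hg.2.2.2.1⟩⟩
  intro u v hadj
  obtain ⟨hu, hv, hdir⟩ := hadj
  obtain ⟨x, y⟩ := u
  rcases hdir with h | h | h | h
  · subst h
    obtain ⟨hx, hy⟩ := hedge x y hu
    exact (hconns y hy x hx).1 hu hv
  · subst h
    obtain ⟨hx, hy⟩ := hedge (x - 1) y hv
    have := (hconns y hy (x - 1) hx).1 hv (by simpa using hu)
    simpa using this.symm
  · subst h
    obtain ⟨hx, hy⟩ := hedge x y hu
    exact (hconns y hy x hx).2 hu hv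
  · subst h
    obtain ⟨hx, hy⟩ := hedge x (y - 1) hv
    have := (hconns (y - 1) hy x hx).2 hv (by simpa using hu)
    simpa using this.symm

-- the root key of a good cell identifies its island
lemma find_reach_iff {maps : List String} (hpre : Pre_solution maps) {u v : Int × Int}
    (hu : GoodP maps u) (hv : GoodP maps v) :
    findB (pass1 maps ((gN maps : Nat) : Int) ((gM maps : Nat) : Int)) (idxP maps u) =
      findB (pass1 maps ((gN maps : Nat) : Int) ((gM maps : Nat) : Int)) (idxP maps v) ↔
    Reach maps u v := by
  obtain ⟨hinv, hadjeq⟩ := pass1_spec hpre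
  constructor
  · intro heq
    have hreach : ∀ w : Int × Int, GoodP maps w →
        Reach maps w (cellOf maps
          (findB (pass1 maps ((gN maps : Nat) : Int) ((gM maps : Nat) : Int)) (idxP maps w))) := by
      intro w hw
      have hb := idxP_bounds hw
      obtain ⟨_, _, hEq, _⟩ := find_props hinv hb.1 hb.2
      rcases hEq with hE | hE
      · rw [← hE, cellOf_idxP hw]
        exact Reach.refl _ hw
      · rw [cellOf_idxP hw] at hE
        exact hE
    have h1 := hreach u hu
    have h2 := hreach v hv
    rw [heq] at h1
    exact reach_trans h1 (reach_symm h2)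
  · intro hr
    induction hr with
    | refl _ => rfl
    | tail _ hadj ih => exact (ih hadj.1).trans (hadjeq _ _ hadj)

-- ===== the second pass as a grouping loop over the scanned good cells =====

def rowLenI (maps : List String) (y : Int) : Int := ((maps.getD y.toNat "").toList.length : Int)

def scanCells (maps : List String) : List (Int × Int) :=
  (PySem.List.pyRange 0 ((gM maps : Nat) : Int) 1).flatMap (fun y =>
    (PySem.List.pyRange 0 (rowLenI maps y) 1).map (fun x => (x, y)))

def goodCells (maps : List String) : List (Int × Int) :=
  (scanCells maps).filter (fun c => cellAt maps c.1 c.2 != 'X')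

-- the union-find root of a cell's index, the dict key of its island
def rootK (maps : List String) (c : Int × Int) : Int :=
  findB (pass1 maps ((gN maps : Nat) : Int) ((gM maps : Nat) : Int)) (idxP maps c)

lemma mem_scanCells {maps : List String} {c : Int × Int} :
    c ∈ scanCells maps ↔
      0 ≤ c.2 ∧ c.2 < ((gM maps : Nat) : Int) ∧ 0 ≤ c.1 ∧ c.1 < rowLenI maps c.2 := by
  obtain ⟨x, y⟩ := c
  simp only [scanCells, List.mem_flatMap, List.mem_map, PySem.List.mem_pyRange_one,
    Prod.mk.injEq]
  constructor
  · rintro ⟨y', hy', x', hx', rfl, rfl⟩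
    exact ⟨hy'.1, hy'.2, hx'.1, hx'.2⟩
  · rintro ⟨h1, h2, h3, h4⟩
    exact ⟨y, ⟨h1, h2⟩, x, ⟨h3, h4⟩, rfl, rfl⟩

lemma nodup_scanCells (maps : List String) : (scanCells maps).Nodup := by
  unfold scanCells
  rw [List.nodup_flatMap]
  constructor
  · intro y _
    exact (PySem.List.nodup_pyRange_one _ _).map
      (fun a b h => by simpa using congrArg Prod.fst h)
  · refine List.Pairwise.imp ?_ (PySem.List.nodup_pyRange_one 0 ((gM maps : Nat) : Int))
    intro y y' hne
    rw [Function.onFun, List.disjoint_left]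
    rintro ⟨a, b⟩ h1 h2
    rw [List.mem_map] at h1 h2
    obtain ⟨x1, _, he1⟩ := h1
    obtain ⟨x2, _, he2⟩ := h2
    have hb1 : y = b := by simpa using congrArg Prod.snd he1
    have hb2 : y' = b := by simpa using congrArg Prod.snd he2
    exact hne (hb1.trans hb2.symm)

lemma nodup_goodCells (maps : List String) : (goodCells maps).Nodup :=
  (nodup_scanCells maps).filter _

lemma mem_goodCells {maps : List String} (hpre : Pre_solution maps) {c : Int × Int} :
    c ∈ goodCells maps ↔ GoodP maps c := by
  obtain ⟨x, y⟩ := c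
  rw [goodCells, List.mem_filter, mem_scanCells]
  simp only [bne_iff_ne, ne_eq]
  constructor
  · rintro ⟨⟨h1, h2, h3, h4⟩, h5⟩
    have h5' : cellAt maps x y ≠ 'X' := by simpa using h5
    exact good_of_cell hpre h3 h1 h2 h5'
  · intro hg
    have hce := cell_exists (show cellAt maps x y ≠ 'X' from hg.2.2.2.2)
    refine ⟨⟨hg.2.2.1, hg.2.2.2.1, hg.1, ?_⟩, by simpa using hg.2.2.2.2⟩
    show x < rowLenI maps y
    unfold rowLenI
    omega

-- the nested scan loop with an 'X' guard is the flat loop over the good cells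
lemma flatten_scan {σ : Type} (maps : List String) (g : σ → (Int × Int) → σ) (init : σ) :
    (PySem.List.pyRange 0 ((gM maps : Nat) : Int) 1).foldl (fun s y =>
      (PySem.List.pyRange 0 (rowLenI maps y) 1).foldl (fun s x =>
        if cellAt maps x y ≠ 'X' then g s (x, y) else s) s) init =
    (goodCells maps).foldl g init := by
  unfold goodCells scanCells
  rw [List.foldl_filter, List.foldl_flatMap]
  refine PySem.List.foldl_congr_mem _ _ _ _ ?_
  intro s y _
  rw [List.foldl_map]
  refine PySem.List.foldl_congr_mem _ _ _ _ ?_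
  intro s' x _
  by_cases hc : cellAt maps x y ≠ 'X'
  · rw [if_pos hc, if_pos (by simpa using hc)]
  · rw [if_neg hc, if_neg (by simpa using hc)]

-- running sums grouped by key: the final value at k is the sum of v over the k-keyed elements
lemma getD_group {α : Type} (key : α → Int) (v : α → Int) :
    ∀ (l : List α) (d : PySem.Dict Int Int) (k : Int),
    (l.foldl (fun d c => d.insert (key c) (d.getD (key c) 0 + v c)) d).getD k 0
      = d.getD k 0 + ((l.filter (fun c => key c == k)).map v).sum := by
  intro l
  induction l with
  | nil => intro d k; simp
  | cons c t ih =>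
    intro d k
    rw [List.foldl_cons, ih]
    by_cases hk : key c = k
    · rw [List.filter_cons_of_pos (by simpa using hk)]
      rw [PySem.Dict.getD_insert]
      rw [if_pos hk.symm, hk]
      simp only [List.map_cons, List.sum_cons]
      ring
    · rw [List.filter_cons_of_neg (by simpa using hk)]
      rw [PySem.Dict.getD_insert, if_neg (fun h => hk h.symm)]

lemma pass2_flat (maps : List String) (p : List Int) :
    pass2 maps p ((gN maps : Nat) : Int) ((gM maps : Nat) : Int) =
      (goodCells maps).foldl (fun d c =>
        d.insert (findB p (idxP maps c))
          (d.getD (findB p (idxP maps c)) 0 + digitAt maps c.1 c.2)) PySem.Dict.empty := by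
  rw [← flatten_scan maps (fun d c =>
    d.insert (findB p (idxP maps c)) (d.getD (findB p (idxP maps c)) 0 + digitAt maps c.1 c.2))
    PySem.Dict.empty]
  rfl

-- ===== the spine: the scan order of island representatives, shared by both programs =====

noncomputable def spineStep (maps : List String)
    (st : Finset (Int × Int) × List (Int × Int)) (c : Int × Int) :
    Finset (Int × Int) × List (Int × Int) :=
  if c ∈ st.1 then st else (st.1 ∪ reachF maps c, st.2 ++ [c])

lemma spine_run {maps : List String} (hpre : Pre_solution maps) :
    ∀ (cells : List (Int × Int)), (∀ c ∈ cells, GoodP maps c) →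
    ∀ (st : Finset (Int × Int) × List (Int × Int)),
    (∀ r ∈ st.2, GoodP maps r) →
    (∀ c, c ∈ st.1 ↔ ∃ r ∈ st.2, c ∈ reachF maps r) →
    (∀ r ∈ (cells.foldl (spineStep maps) st).2, GoodP maps r) ∧
    (∀ c, c ∈ (cells.foldl (spineStep maps) st).1 ↔
      ∃ r ∈ (cells.foldl (spineStep maps) st).2, c ∈ reachF maps r) ∧
    PySem.Set.update (st.2.map (rootK maps)) (cells.map (rootK maps)) =
      ((cells.foldl (spineStep maps) st).2).map (rootK maps) := by
  intro cells
  induction cells with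
  | nil =>
    intro _ st hg hch
    exact ⟨hg, hch, by simp [PySem.Set.update_nil]⟩
  | cons c t ih =>
    intro hcs st hg hch
    have hcg : GoodP maps c := hcs c List.mem_cons_self
    rw [List.foldl_cons, List.map_cons, PySem.Set.update_cons]
    by_cases hmem : c ∈ st.1
    · have hstep : spineStep maps st c = st := if_pos hmem
      rw [hstep]
      obtain ⟨r, hr, hcr⟩ := (hch c).1 hmem
      have hroot : rootK maps c = rootK maps r :=
        ((find_reach_iff hpre (hg r hr) hcg).2 (mem_reachF.1 hcr)).symm
      have hadd : PySem.Set.add (st.2.map (rootK maps)) (rootK maps c) =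
          st.2.map (rootK maps) :=
        PySem.Set.add_of_mem (by rw [hroot]; exact List.mem_map_of_mem hr)
      rw [hadd]
      exact ih (fun x hx => hcs x (List.mem_cons_of_mem _ hx)) st hg hch
    · have hstep : spineStep maps st c = (st.1 ∪ reachF maps c, st.2 ++ [c]) := if_neg hmem
      rw [hstep]
      have hfresh : rootK maps c ∉ st.2.map (rootK maps) := by
        intro hc
        obtain ⟨r, hr, heq⟩ := List.mem_map.1 hc
        have : Reach maps r c := (find_reach_iff hpre (hg r hr) hcg).1 heq
        exact hmem ((hch c).2 ⟨r, hr, mem_reachF.2 this⟩)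
      have hadd : PySem.Set.add (st.2.map (rootK maps)) (rootK maps c) =
          st.2.map (rootK maps) ++ [rootK maps c] :=
        PySem.Set.add_of_not_mem hfresh
      rw [hadd]
      have hmap : st.2.map (rootK maps) ++ [rootK maps c] =
          (st.2 ++ [c]).map (rootK maps) := by
        rw [List.map_append, List.map_singleton]
      rw [hmap]
      refine ih (fun x hx => hcs x (List.mem_cons_of_mem _ hx)) _ ?_ ?_
      · intro r hr
        rcases List.mem_append.1 hr with hr' | hr'
        · exact hg r hr'
        · rw [List.mem_singleton.1 hr']
          exact hcg
      · intro c'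
        rw [Finset.mem_union, hch c']
        constructor
        · rintro (⟨r, hr, hcr⟩ | hcr)
          · exact ⟨r, List.mem_append.2 (Or.inl hr), hcr⟩
          · exact ⟨c, List.mem_append.2 (Or.inr (List.mem_singleton.2 rfl)), hcr⟩
        · rintro ⟨r, hr, hcr⟩
          rcases List.mem_append.1 hr with hr' | hr'
          · exact Or.inl ⟨r, hr', hcr⟩
          · rw [List.mem_singleton.1 hr'] at hcr
            exact Or.inr hcr

-- each island's grouped digit sum is the component sum of its representative
lemma group_compSum {maps : List String} (hpre : Pre_solution maps) {r : Int × Int}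
    (hr : GoodP maps r) :
    (((goodCells maps).filter (fun c => rootK maps c == rootK maps r)).map
      (fun c => digitAt maps c.1 c.2)).sum = compSum maps r := by
  have hnd : (((goodCells maps).filter (fun c => rootK maps c == rootK maps r))).Nodup :=
    (nodup_goodCells maps).filter _
  have htf : (((goodCells maps).filter (fun c => rootK maps c == rootK maps r))).toFinset =
      reachF maps r := by
    ext c
    rw [List.mem_toFinset, List.mem_filter, mem_goodCells hpre, mem_reachF, beq_iff_eq]
    constructor
    · rintro ⟨hcg, heq⟩
      exact (find_reach_iff hpre hr hcg).1 heq.symm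
    · intro hreach
      exact ⟨reach_good hreach, ((find_reach_iff hpre hr (reach_good hreach)).2 hreach).symm⟩
  rw [← List.sum_toFinset _ hnd, htf]
  rfl

-- the dict of pass 2: values are the per-island sums, in representative scan order
lemma pass2_values {maps : List String} (hpre : Pre_solution maps) :
    (pass2 maps (pass1 maps ((gN maps : Nat) : Int) ((gM maps : Nat) : Int))
        ((gN maps : Nat) : Int) ((gM maps : Nat) : Int)).values =
      (((goodCells maps).foldl (spineStep maps) (∅, [])).2).map (compSum maps) := by
  rw [pass2_flat]
  rw [show (fun (d : PySem.Dict Int Int) (c : Int × Int) =>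
      d.insert (findB (pass1 maps ((gN maps : Nat) : Int) ((gM maps : Nat) : Int)) (idxP maps c))
        (d.getD (findB (pass1 maps ((gN maps : Nat) : Int) ((gM maps : Nat) : Int))
          (idxP maps c)) 0 + digitAt maps c.1 c.2)) =
      (fun (d : PySem.Dict Int Int) (c : Int × Int) =>
        d.insert (rootK maps c) (d.getD (rootK maps c) 0 + digitAt maps c.1 c.2)) from rfl]
  have hkeys : ((goodCells maps).foldl (fun d c =>
      d.insert (rootK maps c)
        (d.getD (rootK maps c) 0 + digitAt maps c.1 c.2)) PySem.Dict.empty).keys =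
      PySem.Set.update PySem.Dict.empty.keys ((goodCells maps).map (rootK maps)) :=
    PySem.Dict.keys_foldl_insert_key _ _ _ _
  have hnd : ((goodCells maps).foldl (fun d c =>
      d.insert (rootK maps c)
        (d.getD (rootK maps c) 0 + digitAt maps c.1 c.2)) PySem.Dict.empty).keys.Nodup :=
    PySem.Dict.nodup_keys_foldl_insert_key _ _ _ _ (by simp [PySem.Dict.keys_empty])
  obtain ⟨hreps_good, _, hS1⟩ :=
    spine_run hpre (goodCells maps) (fun c hc => (mem_goodCells hpre).1 hc) (∅, [])
      (by simp) (by simp)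
  rw [PySem.Dict.values_eq_map_keys _ hnd 0, hkeys]
  have hupd : PySem.Set.update (PySem.Dict.empty : PySem.Dict Int Int).keys
      ((goodCells maps).map (rootK maps)) =
      (((goodCells maps).foldl (spineStep maps) (∅, [])).2).map (rootK maps) := by
    rw [PySem.Dict.keys_empty]
    exact hS1
  rw [hupd, List.map_map]
  refine List.map_congr_left ?_
  intro r hrm
  have hrg : GoodP maps r := hreps_good r hrm
  show ((goodCells maps).foldl (fun d c =>
      d.insert (rootK maps c) (d.getD (rootK maps c) 0 + digitAt maps c.1 c.2))
      PySem.Dict.empty).getD (rootK maps r) 0 = compSum maps r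
  rw [getD_group (rootK maps) (fun c => digitAt maps c.1 c.2) (goodCells maps)
      PySem.Dict.empty (rootK maps r)]
  rw [PySem.Dict.getD_empty, zero_add]
  exact group_compSum hpre hrg

-- ===== coupling A's outer scan with the spine =====

-- per-cell step function of A's outer loop, on canonical arguments
def stepA (maps : List String) (n m : Int) (st : List (List Int) × List Int) (y x : Int) :
    List (List Int) × List Int :=
  if cellAt maps x y ≠ 'X' ∧ mgetA st.1 x y = 0 then
    ((dfsA maps st.1 [(x, y)] n m).1, st.2 ++ [(dfsA maps st.1 [(x, y)] n m).2])
  else st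

noncomputable def stepS (maps : List String)
    (st : Finset (Int × Int) × List (Int × Int)) (y x : Int) :
    Finset (Int × Int) × List (Int × Int) :=
  if cellAt maps x y ≠ 'X' then spineStep maps st (x, y) else st

-- the coupling between A's state and the spine state along the outer scan
def CoupS (maps : List String) (stA : List (List Int) × List Int)
    (st : Finset (Int × Int) × List (Int × Int)) : Prop :=
  ShapeA maps stA.1 ∧ visSet maps stA.1 = st.1 ∧ ClosedF maps st.1 ∧
  (∀ r ∈ st.2, GoodP maps r) ∧ stA.2 = st.2.map (compSum maps)

lemma cell_simS {maps : List String} (hpre : Pre_solution maps) {x y : Int}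
    (hx : 0 ≤ x) (hy : 0 ≤ y ∧ y < (gM maps : Int))
    {stA : List (List Int) × List Int} {st : Finset (Int × Int) × List (Int × Int)}
    (h : CoupS maps stA st) :
    CoupS maps (stepA maps (gN maps : Int) (gM maps : Int) stA y x)
      (stepS maps st y x) := by
  obtain ⟨hsh, hvis, hcl, hgood, hans⟩ := h
  by_cases hcell : cellAt maps x y = 'X'
  · unfold stepA stepS
    rw [if_neg (by tauto), if_neg (by tauto)]
    exact ⟨hsh, hvis, hcl, hgood, hans⟩
  · have hxn : x < (gN maps : Int) := cell_lt_n hpre hx hy.1 hy.2 hcell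
    have hb : 0 ≤ x ∧ x < (gN maps : Int) ∧ 0 ≤ y ∧ y < (gM maps : Int) :=
      ⟨hx, hxn, hy.1, hy.2⟩
    have hcond : (mgetA stA.1 x y = 0) ↔ ((x, y) ∉ st.1) := by
      rw [← hvis]
      constructor
      · intro h0 hmem
        rw [mem_visSet hb] at hmem
        exact hmem h0
      · intro hnm
        by_contra h0
        exact hnm ((mem_visSet hb).2 h0)
    unfold stepA stepS spineStep
    by_cases h0 : mgetA stA.1 x y = 0
    · rw [if_pos ⟨hcell, h0⟩, if_pos hcell, if_neg (hcond.1 h0)]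
      have hgood0 : GoodP maps (x, y) := ⟨hx, hxn, hy.1, hy.2, hcell⟩
      have hnotA : (x, y) ∉ visSet maps stA.1 := by rw [hvis]; exact hcond.1 h0
      have hclA : ClosedF maps (visSet maps stA.1) := by rw [hvis]; exact hcl
      obtain ⟨hshA, hvisA, hscoreA⟩ :=
        dfsA_spec rfl rfl stA.1 (x, y) hsh hgood0 hnotA hclA
      refine ⟨hshA, ?_, ?_, ?_, ?_⟩
      · rw [hvisA, hvis]
      · show ClosedF maps (st.1 ∪ reachF maps (x, y))
        exact closedF_union hcl (closedF_reachF _)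
      · intro r hr
        rcases List.mem_append.1 hr with hr' | hr'
        · exact hgood r hr'
        · rw [List.mem_singleton.1 hr']
          exact hgood0
      · rw [hscoreA, hans, List.map_append, List.map_singleton]
    · rw [if_neg (by tauto), if_pos hcell,
        if_pos (by by_contra hmem; exact h0 (hcond.2 hmem))]
      exact ⟨hsh, hvis, hcl, hgood, hans⟩

lemma row_simS {maps : List String} (hpre : Pre_solution maps) {y : Int}
    (hy : 0 ≤ y ∧ y < (gM maps : Int)) :
    ∀ (xs : List Int), (∀ x ∈ xs, 0 ≤ x) →
    ∀ {stA : List (List Int) × List Int} {st : Finset (Int × Int) × List (Int × Int)},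
    CoupS maps stA st →
    CoupS maps
      (xs.foldl (fun st x => stepA maps (gN maps : Int) (gM maps : Int) st y x) stA)
      (xs.foldl (fun st x => stepS maps st y x) st) := by
  intro xs
  induction xs with
  | nil => intro _ _ _ h; exact h
  | cons a t ih =>
    intro hmem stA st h
    rw [List.foldl_cons, List.foldl_cons]
    exact ih (fun x hx => hmem x (List.mem_cons_of_mem _ hx))
      (cell_simS hpre (hmem a List.mem_cons_self) hy h)

lemma grid_simS {maps : List String} (hpre : Pre_solution maps) :
    ∀ (ys : List Int), (∀ y ∈ ys, 0 ≤ y ∧ y < (gM maps : Int)) →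
    ∀ {stA : List (List Int) × List Int} {st : Finset (Int × Int) × List (Int × Int)},
    CoupS maps stA st →
    CoupS maps
      (ys.foldl (fun st y =>
        (PySem.List.pyRange 0 ((maps.getD y.toNat "").toList.length : Int) 1).foldl
          (fun st x => stepA maps (gN maps : Int) (gM maps : Int) st y x) st) stA)
      (ys.foldl (fun st y =>
        (PySem.List.pyRange 0 ((maps.getD y.toNat "").toList.length : Int) 1).foldl
          (fun st x => stepS maps st y x) st) st) := by
  intro ys
  induction ys with
  | nil => intro _ _ _ h; exact h
  | cons a t ih =>
    intro hmem stA st h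
    rw [List.foldl_cons, List.foldl_cons]
    refine ih (fun y hy => hmem y (List.mem_cons_of_mem _ hy)) ?_
    refine row_simS hpre (hmem a List.mem_cons_self) _ ?_ h
    intro x hx
    rw [PySem.List.mem_pyRange_one] at hx
    exact hx.1

def outerA (maps : List String) : List (List Int) × List Int :=
  (PySem.List.pyRange 0 (gM maps : Int) 1).foldl
    (fun st y => (PySem.List.pyRange 0 ((maps.getD y.toNat "").toList.length : Int) 1).foldl
      (fun st x => stepA maps (gN maps : Int) (gM maps : Int) st y x) st)
    (List.replicate (gM maps) (List.replicate (gN maps) (0 : Int)), [])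

lemma enum_fold {α σ : Type} (l : List α) (d : α) (F : σ → Int × α → σ) (init : σ) :
    (PySem.List.enumerate l).foldl F init =
      (PySem.List.pyRange 0 (l.length : Int) 1).foldl
        (fun st j => F st (j, PySem.List.pyGetD l j d)) init := by
  rw [PySem.List.enumerate_eq_map_pyRange (d := d), List.foldl_map]
  simp

lemma mget0 (M N : Nat) (x y : Int) :
    mgetA (List.replicate M (List.replicate N (0 : Int))) x y = 0 := by
  unfold mgetA
  simp only [List.getD_eq_getElem?_getD, List.getElem?_replicate]
  split_ifs
  · simp only [Option.getD_some, List.getElem?_replicate]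
    split_ifs <;> rfl
  · rfl

lemma vis0 (maps : List String) :
    visSet maps (List.replicate (gM maps) (List.replicate (gN maps) (0 : Int))) = ∅ := by
  ext p
  simp [visSet, mget0]

lemma shape0 (maps : List String) :
    ShapeA maps (List.replicate (gM maps) (List.replicate (gN maps) (0 : Int))) := by
  refine ⟨List.length_replicate, ?_⟩
  intro r hr
  rw [List.eq_of_mem_replicate hr]
  exact List.length_replicate

lemma solutionA_eq {maps : List String} (hpre : Pre_solution maps) :
    solution maps =
      (if (PySem.List.sorted (outerA maps).2 (fun v => v) false).length = 0 then [-1]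
       else PySem.List.sorted (outerA maps).2 (fun v => v) false) := by
  have hne : maps ≠ [] := hpre.1
  have hn : (((PySem.List.pyGet? maps 0).getD "").toList.length : Int) = (gN maps : Int) := by
    cases maps with
    | nil => exact absurd rfl hne
    | cons a t =>
      simp [PySem.List.pyGet?, PySem.List.pyIdx?, gN]
  have h1 : solution maps =
      (if (PySem.List.sorted
        ((PySem.List.enumerate maps).foldl (fun st yrow =>
          (PySem.List.enumerate yrow.2.toList).foldl (fun st xcol =>
            if xcol.2 ≠ 'X' ∧ mgetA st.1 xcol.1 yrow.1 = 0 then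
              ((dfsA maps st.1 [(xcol.1, yrow.1)]
                  (((PySem.List.pyGet? maps 0).getD "").toList.length : Int)
                  (maps.length : Int)).1,
                st.2 ++ [(dfsA maps st.1 [(xcol.1, yrow.1)]
                  (((PySem.List.pyGet? maps 0).getD "").toList.length : Int)
                  (maps.length : Int)).2])
            else st) st)
          (List.replicate (maps.length : Int).toNat
            (List.replicate (((PySem.List.pyGet? maps 0).getD "").toList.length : Int).toNat
              (0 : Int)), [])).2 (fun v => v) false).length = 0 then [-1]
       else PySem.List.sorted
        ((PySem.List.enumerate maps).foldl (fun st yrow =>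
          (PySem.List.enumerate yrow.2.toList).foldl (fun st xcol =>
            if xcol.2 ≠ 'X' ∧ mgetA st.1 xcol.1 yrow.1 = 0 then
              ((dfsA maps st.1 [(xcol.1, yrow.1)]
                  (((PySem.List.pyGet? maps 0).getD "").toList.length : Int)
                  (maps.length : Int)).1,
                st.2 ++ [(dfsA maps st.1 [(xcol.1, yrow.1)]
                  (((PySem.List.pyGet? maps 0).getD "").toList.length : Int)
                  (maps.length : Int)).2])
            else st) st)
          (List.replicate (maps.length : Int).toNat
            (List.replicate (((PySem.List.pyGet? maps 0).getD "").toList.length : Int).toNat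
              (0 : Int)), [])).2 (fun v => v) false) := rfl
  rw [h1, hn]
  have hm' : ((maps.length : Int)) = (gM maps : Int) := rfl
  rw [hm']
  have htoN : ((gN maps : Int)).toNat = gN maps := Int.toNat_natCast _
  have htoM : ((gM maps : Int)).toNat = gM maps := Int.toNat_natCast _
  rw [htoN, htoM]
  have hfold :
      (PySem.List.enumerate maps).foldl (fun st yrow =>
        (PySem.List.enumerate yrow.2.toList).foldl (fun st xcol =>
          if xcol.2 ≠ 'X' ∧ mgetA st.1 xcol.1 yrow.1 = 0 then
            ((dfsA maps st.1 [(xcol.1, yrow.1)] (gN maps : Int) (gM maps : Int)).1,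
              st.2 ++ [(dfsA maps st.1 [(xcol.1, yrow.1)] (gN maps : Int) (gM maps : Int)).2])
          else st) st)
        (List.replicate (gM maps) (List.replicate (gN maps) (0 : Int)), []) = outerA maps := by
    rw [enum_fold maps "" _ _]
    unfold outerA
    refine PySem.List.foldl_congr_mem _ _ _ _ ?_
    intro st j hj
    rw [PySem.List.mem_pyRange_one] at hj
    have hrow : PySem.List.pyGetD maps j "" = maps.getD j.toNat "" := by
      rw [PySem.List.pyGetD_of_nonneg _ _ hj.1]
    rw [enum_fold (PySem.List.pyGetD maps j "").toList 'X' _ _, hrow]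
    refine PySem.List.foldl_congr_mem _ _ _ _ ?_
    intro st2 x hx
    rw [PySem.List.mem_pyRange_one] at hx
    have hchar : PySem.List.pyGetD (maps.getD j.toNat "").toList x 'X' = cellAt maps x j := by
      rw [PySem.List.pyGetD_of_nonneg _ _ hx.1]
      rfl
    rw [hchar]
    rfl
  rw [hfold]

noncomputable def outerS (maps : List String) : Finset (Int × Int) × List (Int × Int) :=
  (PySem.List.pyRange 0 (gM maps : Int) 1).foldl
    (fun st y => (PySem.List.pyRange 0 ((maps.getD y.toNat "").toList.length : Int) 1).foldl
      (fun st x => stepS maps st y x) st)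
    (∅, [])

lemma outerS_flat (maps : List String) :
    outerS maps = (goodCells maps).foldl (spineStep maps) (∅, []) := by
  rw [← flatten_scan maps (spineStep maps) ((∅, []) : Finset (Int × Int) × List (Int × Int))]
  rfl

lemma outerA_couple {maps : List String} (hpre : Pre_solution maps) :
    CoupS maps (outerA maps) (outerS maps) := by
  have hinit : CoupS maps
      (List.replicate (gM maps) (List.replicate (gN maps) (0 : Int)), [])
      ((∅, []) : Finset (Int × Int) × List (Int × Int)) := by
    refine ⟨shape0 maps, vis0 maps, ?_, by simp, rfl⟩
    intro p hp
    exact absurd hp (Finset.notMem_empty _)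
  unfold outerA outerS
  refine grid_simS hpre _ ?_ hinit
  intro y hy
  rw [PySem.List.mem_pyRange_one] at hy
  exact hy

lemma solutionB_eq {maps : List String} (hpre : Pre_solution maps) :
    solution_alt maps =
      (if (PySem.List.sorted
            (pass2 maps (pass1 maps (gN maps : Int) (gM maps : Int))
              (gN maps : Int) (gM maps : Int)).values (fun v => v) false) = [] then [-1]
       else PySem.List.sorted
            (pass2 maps (pass1 maps (gN maps : Int) (gM maps : Int))
              (gN maps : Int) (gM maps : Int)).values (fun v => v) false) := by
  have hne : maps ≠ [] := hpre.1
  have hn : (((PySem.List.pyGet? maps 0).getD "").toList.length : Int) = (gN maps : Int) := by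
    cases maps with
    | nil => exact absurd rfl hne
    | cons a t =>
      simp [PySem.List.pyGet?, PySem.List.pyIdx?, gN]
  have h1 : solution_alt maps =
      (if (PySem.List.sorted
            (pass2 maps
              (pass1 maps (((PySem.List.pyGet? maps 0).getD "").toList.length : Int)
                (maps.length : Int))
              (((PySem.List.pyGet? maps 0).getD "").toList.length : Int)
              (maps.length : Int)).values (fun v => v) false) = [] then [-1]
       else PySem.List.sorted
            (pass2 maps
              (pass1 maps (((PySem.List.pyGet? maps 0).getD "").toList.length : Int)
                (maps.length : Int))
              (((PySem.List.pyGet? maps 0).getD "").toList.length : Int)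
              (maps.length : Int)).values (fun v => v) false) := rfl
  rw [h1, hn]
  rfl

lemma solution_equiv : ∀ (maps : List String), Dom_solution maps → Pre_solution maps →
    Spec_solution maps (solution maps) := by
  intro maps _ hpre
  unfold Spec_solution
  rw [solutionA_eq hpre, solutionB_eq hpre]
  have hv : (pass2 maps (pass1 maps (gN maps : Int) (gM maps : Int))
      (gN maps : Int) (gM maps : Int)).values = (outerA maps).2 := by
    calc (pass2 maps (pass1 maps (gN maps : Int) (gM maps : Int))
        (gN maps : Int) (gM maps : Int)).values
        = (((goodCells maps).foldl (spineStep maps) (∅, [])).2).map (compSum maps) :=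
          pass2_values hpre
      _ = ((outerS maps).2).map (compSum maps) := by rw [outerS_flat]
      _ = (outerA maps).2 := ((outerA_couple hpre).2.2.2.2).symm
  rw [hv]
  by_cases hnil : PySem.List.sorted (outerA maps).2 (fun v => v) false = []
  · rw [if_pos (by rw [hnil]; rfl), if_pos hnil]
  · rw [if_neg (fun h => hnil (List.length_eq_zero_iff.1 h)), if_neg hnil]

-- ===== VERDICT (by name: the statement is the Claim_ definition above) =====
theorem solution_spec : Claim_equal_solution := by
  intro maps hdom hpre
  exact solution_equiv maps hdom hpre
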